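-- pv_equiv track=rewrite | github.com/huitre/moltcity | client/sprites/slice_sprites.py | find_sprite_regions
-- ===== SOURCE A (Python) =====
-- from collections import deque
--
-- def find_sprite_regions(visited, w, h, min_size=30):
--     """Find connected regions of non-background (foreground) pixels."""
--     regions = []
--     region_visited = [False] * (w * h)
--
--     for y in range(h):
--         for x in range(w):
--             idx = y * w + x
--             if visited[idx] or region_visited[idx]:
--                 continue
--
--             # BFS to find this connected region
--             min_x, min_y = x, y
--             max_x, max_y = x, y
--             queue = deque([(x, y)])
--             region_pixels = 0
--
--             while queue:
--                 cx, cy = queue.popleft()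
--                 if cx < 0 or cx >= w or cy < 0 or cy >= h:
--                     continue
--                 cidx = cy * w + cx
--                 if visited[cidx] or region_visited[cidx]:
--                     continue
--                 region_visited[cidx] = True
--                 region_pixels += 1
--
--                 min_x = min(min_x, cx)
--                 min_y = min(min_y, cy)
--                 max_x = max(max_x, cx)
--                 max_y = max(max_y, cy)
--
--                 queue.append((cx + 1, cy))
--                 queue.append((cx - 1, cy))
--                 queue.append((cx, cy + 1))
--                 queue.append((cx, cy - 1))
--
--             # Only keep regions above minimum size
--             region_w = max_x - min_x + 1
--             region_h = max_y - min_y + 1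
--             if region_w >= min_size and region_h >= min_size:
--                 regions.append((min_x, min_y, max_x + 1, max_y + 1, region_pixels))
--
--     return regions
-- ===== SOURCE B (Python) =====
-- def find_sprite_regions(visited, w, h, min_size=30):
--     """Find connected regions of non-background (foreground) pixels.
--
--     Two-pass union-find connected-component labelling: one pass unions each
--     foreground pixel with its right and down foreground neighbours (union by
--     smaller root index), a second pass accumulates per-root bounding boxes and
--     pixel counts in a dict keyed by root (insertion order = first row-major
--     pixel of each component), then the dict values are filtered by min_size.
--     """
--     n = w * h
--     parent = list(range(n))
--
--     def find(i):
--         while parent[i] != i: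
--             i = parent[i]
--         return i
--
--     def union(a, b):
--         ra = find(a)
--         rb = find(b)
--         if ra != rb:
--             if ra < rb:
--                 parent[rb] = ra
--             else:
--                 parent[ra] = rb
--
--     for y in range(h):
--         for x in range(w):
--             idx = y * w + x
--             if visited[idx]:
--                 continue
--             if x + 1 < w and not visited[idx + 1]:
--                 union(idx, idx + 1)
--             if y + 1 < h and not visited[idx + w]:
--                 union(idx, idx + w)
--
--     stats = {}
--     for y in range(h):
--         for x in range(w):
--             idx = y * w + x
--             if visited[idx]:
--                 continue
--             r = find(idx)
--             s = stats.get(r)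
--             if s is None:
--                 stats[r] = (x, y, x, y, 1)
--             else:
--                 stats[r] = (min(s[0], x), min(s[1], y),
--                             max(s[2], x), max(s[3], y), s[4] + 1)
--
--     regions = []
--     for s in stats.values():
--         if s[2] - s[0] + 1 >= min_size and s[3] - s[1] + 1 >= min_size:
--             regions.append((s[0], s[1], s[2] + 1, s[3] + 1, s[4]))
--     return regions
-- ===== Notes on version B (the rewrite author's own statement) =====
-- stated objective: alternative
-- what changed: Replaces A's per-seed BFS flood fill (deque, validate-on-pop, incremental region_visited marking with emission during the scan) by classic two-pass union-find connected-component labelling: one pass unions every foreground pixel with its right/down foreground neighbours (union by smaller root index), a second pass folds per-root bounding boxes and counts into a dict in first-seen row-major order, and a final pass filters the dict values by min_size.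
import Mathlib
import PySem

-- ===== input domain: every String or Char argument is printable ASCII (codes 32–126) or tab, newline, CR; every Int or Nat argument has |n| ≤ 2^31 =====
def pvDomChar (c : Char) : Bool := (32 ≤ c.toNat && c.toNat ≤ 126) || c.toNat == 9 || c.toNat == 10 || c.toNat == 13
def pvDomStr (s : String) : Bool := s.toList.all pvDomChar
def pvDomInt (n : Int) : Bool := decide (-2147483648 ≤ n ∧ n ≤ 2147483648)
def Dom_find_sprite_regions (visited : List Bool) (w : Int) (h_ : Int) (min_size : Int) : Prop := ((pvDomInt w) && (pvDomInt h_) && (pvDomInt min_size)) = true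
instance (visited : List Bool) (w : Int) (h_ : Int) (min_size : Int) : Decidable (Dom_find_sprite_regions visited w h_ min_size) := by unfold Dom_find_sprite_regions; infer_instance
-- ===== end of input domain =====

-- B replaces A's per-seed BFS flood fill by two-pass union-find connected-component labelling
-- (union right/down neighbours by smaller root index, then fold per-root stats into a dict);
-- objective: alternative algorithm of the same cost, proved to return the identical region list.

-- ===== PORT A =====
-- termination helper for the BFS loop (cited by pvBfsLoop's decreasing_by)
theorem pv_countP_set_true : ∀ (rv : List Bool) (i : Nat), i < rv.length → rv.getD i false = false →
    (rv.set i true).countP (fun b => !b) < rv.countP (fun b => !b) := by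
  intro rv
  induction rv with
  | nil => intro i h; simp at h
  | cons b t ih =>
    intro i hi hb
    cases i with
    | zero =>
      simp only [List.getD_eq_getElem?_getD] at hb
      simp_all [List.countP_cons]
    | succ j =>
      simp only [List.set_cons_succ, List.countP_cons]
      have := ih j (by simpa using hi) (by simpa using hb)
      omega

-- BFS over the pixel queue, exactly A's 'while queue' loop (validate on pop, mark in region_visited,
-- push the four neighbours, fold the bounding box and pixel count).
def pvBfsLoop (visited : List Bool) (w h_ : Int) (rv : List Bool) (q : List (Int × Int))
    (st : Int × Int × Int × Int × Int) : List Bool × (Int × Int × Int × Int × Int) :=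
  match q with
  | [] => (rv, st)
  | (cx, cy) :: q' =>
    if cx < 0 ∨ w ≤ cx ∨ cy < 0 ∨ h_ ≤ cy then pvBfsLoop visited w h_ rv q' st
    else
      -- cidx = cy*w + cx ≥ 0 here, so .toNat is exact
      if visited.getD (cy * w + cx).toNat false || rv.getD (cy * w + cx).toNat false then
        pvBfsLoop visited w h_ rv q' st
      else if hlen : (cy * w + cx).toNat < rv.length then  -- totality guard; always true (rv has length w*h)
        pvBfsLoop visited w h_ (rv.set (cy * w + cx).toNat true)
          (q' ++ [(cx + 1, cy), (cx - 1, cy), (cx, cy + 1), (cx, cy - 1)])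
          (min st.1 cx, min st.2.1 cy, max st.2.2.1 cx, max st.2.2.2.1 cy, st.2.2.2.2 + 1)
      else pvBfsLoop visited w h_ rv q' st
termination_by 5 * rv.countP (fun b => !b) + q.length
decreasing_by
  all_goals simp only [List.length_cons, List.length_append, List.length_nil]
  all_goals try omega
  all_goals
    rename_i hg
    have hfalse : rv.getD (cy * w + cx).toNat false = false := by
      have h2 : (visited.getD (cy * w + cx).toNat false || rv.getD (cy * w + cx).toNat false) = false := by
        simpa using hg
      exact (Bool.or_eq_false_iff.mp h2).2
    have := pv_countP_set_true rv (cy * w + cx).toNat hlen hfalse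
    omega

-- the body of A's double scan loop over (y, x)
def pvScanA (visited : List Bool) (w h_ min_size : Int)
    (acc : List (List Int) × List Bool) (y x : Int) : List (List Int) × List Bool :=
  if visited.getD (y * w + x).toNat false || acc.2.getD (y * w + x).toNat false then acc
  else
    let r := pvBfsLoop visited w h_ acc.2 [(x, y)] (x, y, x, y, 0)
    if r.2.2.2.1 - r.2.1 + 1 ≥ min_size ∧ r.2.2.2.2.1 - r.2.2.1 + 1 ≥ min_size then
      (acc.1 ++ [[r.2.1, r.2.2.1, r.2.2.2.1 + 1, r.2.2.2.2.1 + 1, r.2.2.2.2.2]], r.1)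
    else (acc.1, r.1)

def find_sprite_regions (visited : List Bool) (w : Int) (h_ : Int) (min_size : Int) : List (List Int) :=
  ((PySem.List.pyRange 0 h_ 1).foldl (fun acc y =>
      (PySem.List.pyRange 0 w 1).foldl (fun acc x => pvScanA visited w h_ min_size acc y x) acc)
    (([] : List (List Int)), List.replicate (w * h_).toNat false)).1

-- ===== PORT B =====
-- find(i): while parent[i] != i: i = parent[i]  (the fuel = len(parent) is a totality guard only:
-- with union-by-smaller-root parent[i] ≤ i, so the chain from i ends within i+1 ≤ len steps)
def pvFind (parent : List Int) : Nat → Int → Int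
  | 0, i => i
  | fuel + 1, i =>
    let p := parent.getD i.toNat 0
    if p = i then i else pvFind parent fuel p

-- union(a, b): attach the larger root below the smaller
def pvUnion (parent : List Int) (a b : Int) : List Int :=
  let ra := pvFind parent parent.length a
  let rb := pvFind parent parent.length b
  if ra = rb then parent
  else if ra < rb then parent.set rb.toNat ra else parent.set ra.toNat rb

-- pass-1 body at pixel (y, x): union with the right and down foreground neighbours
def pvCell1 (visited : List Bool) (w h_ : Int) (par : List Int) (y x : Int) : List Int :=
  if visited.getD (y * w + x).toNat false then par
  else
    let par1 := if x + 1 < w ∧ visited.getD (y * w + x + 1).toNat false = false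
                then pvUnion par (y * w + x) (y * w + x + 1) else par
    if y + 1 < h_ ∧ visited.getD (y * w + x + w).toNat false = false
    then pvUnion par1 (y * w + x) (y * w + x + w) else par1

def pvPass1 (visited : List Bool) (w h_ : Int) : List Int :=
  (PySem.List.pyRange 0 h_ 1).foldl (fun par y =>
      (PySem.List.pyRange 0 w 1).foldl (fun par x => pvCell1 visited w h_ par y x) par)
    ((List.range (w * h_).toNat).map Int.ofNat)

-- pass-2 body at pixel (y, x): fold the pixel into its root's stats entry
def pvCell2 (visited : List Bool) (w : Int) (parent : List Int)
    (d : PySem.Dict Int (Int × Int × Int × Int × Int)) (y x : Int) :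
    PySem.Dict Int (Int × Int × Int × Int × Int) :=
  if visited.getD (y * w + x).toNat false then d
  else
    let r := pvFind parent parent.length (y * w + x)
    match d.get? r with
    | none => d.insert r (x, y, x, y, 1)
    | some s => d.insert r (min s.1 x, min s.2.1 y, max s.2.2.1 x, max s.2.2.2.1 y, s.2.2.2.2 + 1)

def pvPass2 (visited : List Bool) (w h_ : Int) (parent : List Int) :
    PySem.Dict Int (Int × Int × Int × Int × Int) :=
  (PySem.List.pyRange 0 h_ 1).foldl (fun d y =>
      (PySem.List.pyRange 0 w 1).foldl (fun d x => pvCell2 visited w parent d y x) d)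
    PySem.Dict.empty

def find_sprite_regions_alt (visited : List Bool) (w : Int) (h_ : Int) (min_size : Int) : List (List Int) :=
  let parent := pvPass1 visited w h_
  let stats := pvPass2 visited w h_ parent
  stats.values.foldl (fun regions s =>
    if s.2.2.1 - s.1 + 1 ≥ min_size ∧ s.2.2.2.1 - s.2.1 + 1 ≥ min_size then
      regions ++ [[s.1, s.2.1, s.2.2.1 + 1, s.2.2.2.1 + 1, s.2.2.2.2]]
    else regions) []

-- ===== PRECONDITION & SPEC =====
-- Pre_ excludes exactly the inputs where Python A raises IndexError: a positive w*h grid whose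
-- 'visited' list is shorter than w*h (both programs index visited[y*w+x] for every grid cell).
def Pre_find_sprite_regions (visited : List Bool) (w : Int) (h_ : Int) (min_size : Int) : Prop :=
  w < 1 ∨ h_ < 1 ∨ w * h_ ≤ (visited.length : Int)
instance (visited : List Bool) (w : Int) (h_ : Int) (min_size : Int) : Decidable (Pre_find_sprite_regions visited w h_ min_size) := by unfold Pre_find_sprite_regions; infer_instance

def pvWitness_find_sprite_regions : List Bool × Int × Int × Int := ([false, false, true, false], 2, 2, 1)

def Spec_find_sprite_regions (visited : List Bool) (w : Int) (h_ : Int) (min_size : Int) (out : List (List Int)) : Prop := out = find_sprite_regions_alt visited w h_ min_size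
instance (visited : List Bool) (w : Int) (h_ : Int) (min_size : Int) (out : List (List Int)) : Decidable (Spec_find_sprite_regions visited w h_ min_size out) := by unfold Spec_find_sprite_regions; infer_instance

-- ===== CLAIM (what is proved, stated in full; the proofs are below) =====
def Claim_equal_find_sprite_regions : Prop := ∀ (visited : List Bool) (w : Int) (h_ : Int) (min_size : Int), Dom_find_sprite_regions visited w h_ min_size → Pre_find_sprite_regions visited w h_ min_size → Spec_find_sprite_regions visited w h_ min_size (find_sprite_regions visited w h_ min_size)

-- ===== LEMMAS AND PROOFS =====

-- ---- abstract grid view (proof-side only) ----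
def pvInb (w h_ : Int) (c : Int × Int) : Prop := 0 ≤ c.1 ∧ c.1 < w ∧ 0 ≤ c.2 ∧ c.2 < h_

def pvIdx (w : Int) (c : Int × Int) : Int := c.2 * w + c.1

def pvAvail (visited : List Bool) (w h_ : Int) (M0 : Int × Int → Prop) (c : Int × Int) : Prop :=
  pvInb w h_ c ∧ visited.getD (pvIdx w c).toNat false = false ∧ ¬ M0 c

def pvNbr (c c' : Int × Int) : Prop :=
  c' = (c.1 + 1, c.2) ∨ c' = (c.1 - 1, c.2) ∨ c' = (c.1, c.2 + 1) ∨ c' = (c.1, c.2 - 1)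

-- 4-connected reachability from s through cells that are foreground and not in M0
def pvReach (visited : List Bool) (w h_ : Int) (M0 : Int × Int → Prop) (s c : Int × Int) : Prop :=
  Relation.ReflTransGen (fun a b => pvNbr a b ∧ pvAvail visited w h_ M0 b) s c

def pvAvail0 (visited : List Bool) (w h_ : Int) (c : Int × Int) : Prop :=
  pvAvail visited w h_ (fun _ => False) c

def pvReach0 (visited : List Bool) (w h_ : Int) (s c : Int × Int) : Prop :=
  pvReach visited w h_ (fun _ => False) s c

-- the common bounding-box/count accumulator step
def pvStep (st : Int × Int × Int × Int × Int) (c : Int × Int) : Int × Int × Int × Int × Int :=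
  (min st.1 c.1, min st.2.1 c.2, max st.2.2.1 c.1, max st.2.2.2.1 c.2, st.2.2.2.2 + 1)

-- the row-major cell list and the canonical region list both ports are proved equal to
def pvCells (w h_ : Int) : List (Int × Int) :=
  (PySem.List.pyRange 0 h_ 1).flatMap (fun y => (PySem.List.pyRange 0 w 1).map (fun x => (x, y)))

def pvIsFirst (visited : List Bool) (w h_ : Int) (c : Int × Int) : Prop :=
  pvAvail0 visited w h_ c ∧
  ∀ d, pvAvail0 visited w h_ d → pvReach0 visited w h_ c d → pvIdx w c ≤ pvIdx w d

noncomputable def pvFirstD (visited : List Bool) (w h_ : Int) (c : Int × Int) : Bool :=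
  @decide (pvIsFirst visited w h_ c) (Classical.propDecidable _)

noncomputable def pvMemD (visited : List Bool) (w h_ : Int) (m d : Int × Int) : Bool :=
  @decide (pvAvail0 visited w h_ d ∧ pvReach0 visited w h_ m d) (Classical.propDecidable _)

noncomputable def pvEntryPre (visited : List Bool) (w h_ : Int) (l : List (Int × Int))
    (m : Int × Int) : Int × Int × Int × Int × Int :=
  (l.filter (pvMemD visited w h_ m)).foldl pvStep (m.1, m.2, m.1, m.2, 0)

noncomputable def pvEntryC (visited : List Bool) (w h_ : Int) (m : Int × Int) :
    Int × Int × Int × Int × Int :=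
  pvEntryPre visited w h_ (pvCells w h_) m

def pvEmit (min_size : Int) (acc : List (List Int)) (e : Int × Int × Int × Int × Int) :
    List (List Int) :=
  if e.2.2.1 - e.1 + 1 ≥ min_size ∧ e.2.2.2.1 - e.2.1 + 1 ≥ min_size then
    acc ++ [[e.1, e.2.1, e.2.2.1 + 1, e.2.2.2.1 + 1, e.2.2.2.2]]
  else acc

noncomputable def pvCanon (visited : List Bool) (w h_ min_size : Int) : List (List Int) :=
  (((pvCells w h_).filter (pvFirstD visited w h_)).map (pvEntryC visited w h_)).foldl
    (pvEmit min_size) []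

-- ---- basic geometry lemmas ----
theorem pvIdx_bounds {w h_ : Int} {c : Int × Int} (h : pvInb w h_ c) :
    0 ≤ pvIdx w c ∧ pvIdx w c < w * h_ := by
  obtain ⟨hx0, hxw, hy0, hyh⟩ := h
  have hw : 0 < w := lt_of_le_of_lt hx0 hxw
  have h1 : 0 ≤ c.2 * w := mul_nonneg hy0 hw.le
  have h2 : c.2 * w + c.1 < w * h_ := by nlinarith
  exact ⟨by unfold pvIdx; omega, h2⟩

theorem pvIdx_inj {w h_ : Int} {a b : Int × Int} (ha : pvInb w h_ a) (hb : pvInb w h_ b)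
    (h : pvIdx w a = pvIdx w b) : a = b := by
  obtain ⟨hx0, hxw, hy0, hyh⟩ := ha
  obtain ⟨hx0', hxw', hy0', hyh'⟩ := hb
  unfold pvIdx at h
  have hw : 0 < w := lt_of_le_of_lt hx0 hxw
  have hy : a.2 = b.2 := by
    rcases lt_trichotomy a.2 b.2 with hlt | heq | hgt
    · exfalso
      have h1 : 1 * w ≤ (b.2 - a.2) * w := mul_le_mul_of_nonneg_right (by omega) hw.le
      nlinarith
    · exact heq
    · exfalso
      have h1 : 1 * w ≤ (a.2 - b.2) * w := mul_le_mul_of_nonneg_right (by omega) hw.le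
      nlinarith
  have hx : a.1 = b.1 := by rw [hy] at h; linarith
  exact Prod.ext hx hy

theorem pvIdx_toNat_inj {w h_ : Int} {a b : Int × Int} (ha : pvInb w h_ a) (hb : pvInb w h_ b)
    (h : (pvIdx w a).toNat = (pvIdx w b).toNat) : a = b :=
  pvIdx_inj ha hb (by
    have h1 := (pvIdx_bounds ha).1
    have h2 := (pvIdx_bounds hb).1
    omega)

theorem pvNbr_symm {c c' : Int × Int} (h : pvNbr c c') : pvNbr c' c := by
  rcases h with h | h | h | h <;> subst h
  · exact Or.inr (Or.inl (by simp))
  · exact Or.inl (by simp)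
  · exact Or.inr (Or.inr (Or.inr (by simp)))
  · exact Or.inr (Or.inr (Or.inl (by simp)))

theorem pvNbr_mem_list {c c' : Int × Int} (h : pvNbr c c') :
    c' ∈ [(c.1 + 1, c.2), (c.1 - 1, c.2), (c.1, c.2 + 1), (c.1, c.2 - 1)] := by
  rcases h with h | h | h | h <;> simp [h]

theorem pvReach_closed {visited : List Bool} {w h_ : Int} {M0 : Int × Int → Prop} {s : Int × Int}
    (X : List (Int × Int)) (hsX : s ∈ X)
    (hcl : ∀ c ∈ X, ∀ c', pvNbr c c' → pvAvail visited w h_ M0 c' → c' ∈ X) :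
    ∀ c, pvReach visited w h_ M0 s c → c ∈ X := by
  intro c h
  induction h with
  | refl => exact hsX
  | tail hab hbc ih => exact hcl _ ih _ hbc.1 hbc.2

theorem pvReach0_avail {visited : List Bool} {w h_ : Int} {s c : Int × Int}
    (hs : pvAvail0 visited w h_ s) (h : pvReach0 visited w h_ s c) :
    pvAvail0 visited w h_ c := by
  induction h with
  | refl => exact hs
  | tail hab hbc ih => exact hbc.2

theorem pvReach0_trans {visited : List Bool} {w h_ : Int} {a b c : Int × Int}
    (h1 : pvReach0 visited w h_ a b) (h2 : pvReach0 visited w h_ b c) :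
    pvReach0 visited w h_ a c := Relation.ReflTransGen.trans h1 h2

theorem pvReach0_single {visited : List Bool} {w h_ : Int} {a b : Int × Int}
    (hn : pvNbr a b) (hb : pvAvail0 visited w h_ b) : pvReach0 visited w h_ a b :=
  Relation.ReflTransGen.single ⟨hn, hb⟩

theorem pvReach0_symm {visited : List Bool} {w h_ : Int} {s c : Int × Int}
    (hs : pvAvail0 visited w h_ s) (h : pvReach0 visited w h_ s c) :
    pvReach0 visited w h_ c s := by
  induction h with
  | refl => exact Relation.ReflTransGen.refl
  | tail hab hbc ih =>
    exact pvReach0_trans (pvReach0_single (pvNbr_symm hbc.1) (pvReach0_avail hs hab)) ih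

theorem pvStep_rightComm (st : Int × Int × Int × Int × Int) (a b : Int × Int) :
    pvStep (pvStep st a) b = pvStep (pvStep st b) a := by
  simp only [pvStep, Prod.mk.injEq]
  exact ⟨min_right_comm _ _ _, min_right_comm _ _ _, max_right_comm _ _ _,
    max_right_comm _ _ _, trivial⟩

-- ---- cells list: membership, ordering, double-fold conversion ----
theorem pvCells_mem {w h_ : Int} {c : Int × Int} : c ∈ pvCells w h_ ↔ pvInb w h_ c := by
  unfold pvCells pvInb
  simp only [List.mem_flatMap, List.mem_map, PySem.List.mem_pyRange_one]
  constructor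
  · rintro ⟨y, hy, x, hx, rfl⟩
    exact ⟨hx.1, hx.2, hy.1, hy.2⟩
  · rintro ⟨h1, h2, h3, h4⟩
    exact ⟨c.2, ⟨h3, h4⟩, c.1, ⟨h1, h2⟩, rfl⟩

theorem pvCells_pairwise (w h_ : Int) :
    (pvCells w h_).Pairwise (fun a b => pvIdx w a < pvIdx w b) := by
  unfold pvCells
  apply List.pairwise_flatMap.mpr
  refine ⟨?_, ?_⟩
  · intro y _
    apply List.pairwise_map.mpr
    exact (PySem.List.pairwise_lt_pyRange_one 0 w).imp (by
      intro a b hab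
      simpa [pvIdx] using hab)
  · refine (PySem.List.pairwise_lt_pyRange_one 0 h_).imp_of_mem (fun {y y'} hy hy' hlt => ?_)
    intro a ha b hb
    simp only [List.mem_map, PySem.List.mem_pyRange_one] at ha hb
    obtain ⟨x, hx, rfl⟩ := ha
    obtain ⟨x', hx', rfl⟩ := hb
    show y * w + x < y' * w + x'
    nlinarith [hx.1, hx.2, hx'.1, hx'.2]

theorem pvCells_nodup (w h_ : Int) : (pvCells w h_).Nodup :=
  (pvCells_pairwise w h_).imp (fun h => by intro heq; subst heq; omega)

-- every in-bounds cell with a smaller row-major index than the head of 'rest' is in 'done'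
theorem pvCells_earlier {w h_ : Int} {done rest : List (Int × Int)} {c d : Int × Int}
    (hsplit : pvCells w h_ = done ++ c :: rest)
    (hd : pvInb w h_ d) (hlt : pvIdx w d < pvIdx w c) : d ∈ done := by
  have hmem : d ∈ pvCells w h_ := pvCells_mem.mpr hd
  rw [hsplit] at hmem
  rcases List.mem_append.mp hmem with h | h
  · exact h
  · exfalso
    have hpw := pvCells_pairwise w h_
    rw [hsplit] at hpw
    rcases List.mem_cons.mp h with rfl | h'
    · omega
    · have := (List.pairwise_cons.mp (List.pairwise_append.mp hpw).2.1).1 d h'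
      omega

-- members of 'done' come strictly before the head of 'rest'
theorem pvCells_done_lt {w h_ : Int} {done rest : List (Int × Int)} {c d : Int × Int}
    (hsplit : pvCells w h_ = done ++ c :: rest) (hd : d ∈ done) :
    pvIdx w d < pvIdx w c := by
  have hpw := pvCells_pairwise w h_
  rw [hsplit] at hpw
  exact (List.pairwise_append.mp hpw).2.2 d hd c List.mem_cons_self

-- a double loop over y then x is a single fold over the row-major cell list
theorem pvFold_cells {σ : Type} (w h_ : Int) (g : σ → Int → Int → σ) (init : σ) :
    (PySem.List.pyRange 0 h_ 1).foldl (fun s y =>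
        (PySem.List.pyRange 0 w 1).foldl (fun s x => g s y x) s) init
      = (pvCells w h_).foldl (fun s c => g s c.2 c.1) init := by
  unfold pvCells
  generalize PySem.List.pyRange 0 h_ 1 = ys
  induction ys generalizing init with
  | nil => rfl
  | cons y t ih =>
    simp only [List.foldl_cons, List.flatMap_cons, List.foldl_append]
    rw [← ih, List.foldl_map]

theorem pvBfs_spec (visited : List Bool) (w h_ : Int) (M0 : Int × Int → Prop) (s : Int × Int)
    (hs : pvAvail visited w h_ M0 s) :
    ∀ (rv : List Bool) (q : List (Int × Int)) (st : Int × Int × Int × Int × Int),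
    ∀ (D : List (Int × Int)),
    rv.length = (w * h_).toNat →
    (∀ c, pvInb w h_ c → (rv.getD (pvIdx w c).toNat false = true ↔ M0 c ∨ c ∈ D)) →
    (∀ c ∈ D, pvReach visited w h_ M0 s c) →
    (∀ c ∈ q, pvAvail visited w h_ M0 c → pvReach visited w h_ M0 s c) →
    (∀ c ∈ D, ∀ c', pvNbr c c' → pvAvail visited w h_ M0 c' → c' ∈ D ∨ c' ∈ q) →
    (s ∈ D ∨ s ∈ q) →
    D.Nodup →
    ∃ L rv',
      pvBfsLoop visited w h_ rv q st = (rv', L.foldl pvStep st) ∧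
      rv'.length = (w * h_).toNat ∧
      (∀ c, pvInb w h_ c → (rv'.getD (pvIdx w c).toNat false = true ↔ M0 c ∨ c ∈ D ∨ c ∈ L)) ∧
      (D ++ L).Nodup ∧
      (∀ c, (c ∈ D ∨ c ∈ L) ↔ pvReach visited w h_ M0 s c) := by
  intro rv q st
  induction rv, q, st using pvBfsLoop.induct (visited := visited) (w := w) (h_ := h_) with
  | case1 rv st =>
    intro D hlen hH2 hH3 _ hH5 hH6 hND
    refine ⟨[], rv, by simp [pvBfsLoop], hlen, by simpa using hH2, by simpa using hND, ?_⟩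
    intro c
    constructor
    · rintro (hc | hc)
      · exact hH3 c hc
      · simp at hc
    · intro hr
      exact Or.inl (pvReach_closed D (by simpa using hH6)
        (fun d hd c' hn ha => by simpa using hH5 d hd c' hn ha) c hr)
  | case2 rv st cx cy q' hcond ih =>
    intro D hlen hH2 hH3 hH4 hH5 hH6 hND
    have hninb : ¬ pvInb w h_ (cx, cy) := by simp only [pvInb]; omega
    obtain ⟨L, rv', hEq, hlen', hMk, hND', hMem⟩ := ih D hlen hH2 hH3
      (fun c hc ha => hH4 c (List.mem_cons_of_mem _ hc) ha)
      (fun d hd c' hn ha => by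
        rcases hH5 d hd c' hn ha with h | h
        · exact Or.inl h
        · rcases List.mem_cons.mp h with rfl | h
          · exact absurd ha.1 hninb
          · exact Or.inr h)
      (by
        rcases hH6 with h | h
        · exact Or.inl h
        · rcases List.mem_cons.mp h with rfl | h
          · exact absurd hs.1 hninb
          · exact Or.inr h) hND
    exact ⟨L, rv', by rw [pvBfsLoop, if_pos hcond]; exact hEq, hlen', hMk, hND', hMem⟩
  | case3 rv st cx cy q' hcond hguard ih =>
    intro D hlen hH2 hH3 hH4 hH5 hH6 hND
    have hInb : pvInb w h_ (cx, cy) := by simp only [pvInb]; omega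
    have hcD : pvAvail visited w h_ M0 (cx, cy) → (cx, cy) ∈ D := by
      intro ha
      have hvis : visited.getD (cy * w + cx).toNat false = false := by
        have := ha.2.1; simpa [pvIdx] using this
      have hrv : rv.getD (cy * w + cx).toNat false = true := by
        rcases Bool.or_eq_true_iff.mp hguard with h | h
        · rw [hvis] at h; exact absurd h (by simp)
        · exact h
      rcases (hH2 (cx, cy) hInb).mp (by simpa [pvIdx] using hrv) with h | h
      · exact absurd h ha.2.2
      · exact h
    obtain ⟨L, rv', hEq, hlen', hMk, hND', hMem⟩ := ih D hlen hH2 hH3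
      (fun c hc ha => hH4 c (List.mem_cons_of_mem _ hc) ha)
      (fun d hd c' hn ha => by
        rcases hH5 d hd c' hn ha with h | h
        · exact Or.inl h
        · rcases List.mem_cons.mp h with rfl | h
          · exact Or.inl (hcD ha)
          · exact Or.inr h)
      (by
        rcases hH6 with h | h
        · exact Or.inl h
        · rcases List.mem_cons.mp h with rfl | h
          · exact Or.inl (hcD hs)
          · exact Or.inr h) hND
    exact ⟨L, rv', by rw [pvBfsLoop, if_neg hcond, if_pos hguard]; exact hEq, hlen', hMk, hND', hMem⟩
  | case4 rv st cx cy q' hcond hguard hidx ih =>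
    intro D hlen hH2 hH3 hH4 hH5 hH6 hND
    have hInb : pvInb w h_ (cx, cy) := by simp only [pvInb]; omega
    have hgf : (visited.getD (cy * w + cx).toNat false || rv.getD (cy * w + cx).toNat false) = false := by
      simpa using hguard
    obtain ⟨hvisf, hrvf⟩ := Bool.or_eq_false_iff.mp hgf
    have hnotold : ¬ (M0 (cx, cy) ∨ (cx, cy) ∈ D) := by
      intro h
      have := (hH2 (cx, cy) hInb).mpr h
      rw [show pvIdx w (cx, cy) = cy * w + cx from rfl] at this
      rw [hrvf] at this; exact absurd this (by simp)
    have hAvail : pvAvail visited w h_ M0 (cx, cy) :=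
      ⟨hInb, by simpa [pvIdx] using hvisf, fun h => hnotold (Or.inl h)⟩
    have hReachc : pvReach visited w h_ M0 s (cx, cy) :=
      hH4 (cx, cy) List.mem_cons_self hAvail
    have hidxeq : (pvIdx w (cx, cy)).toNat = (cy * w + cx).toNat := rfl
    have hH2' : ∀ c, pvInb w h_ c →
        ((rv.set (cy * w + cx).toNat true).getD (pvIdx w c).toNat false = true ↔
          M0 c ∨ c ∈ D ++ [(cx, cy)]) := by
      intro c hc
      by_cases hceq : c = (cx, cy)
      · subst hceq
        rw [List.getD_eq_getElem?_getD, hidxeq, List.getElem?_set_self hidx]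
        simp
      · have hne : (pvIdx w c).toNat ≠ (cy * w + cx).toNat := by
          intro h
          exact hceq (pvIdx_toNat_inj hc hInb (hidxeq ▸ h))
        rw [List.getD_eq_getElem?_getD,
          List.getElem?_set_ne (i := (cy * w + cx).toNat) (j := (pvIdx w c).toNat) (by omega),
          ← List.getD_eq_getElem?_getD, hH2 c hc]
        simp only [List.mem_append, List.mem_singleton]
        constructor
        · rintro (h | h)
          · exact Or.inl h
          · exact Or.inr (Or.inl h)
        · rintro (h | h | h)
          · exact Or.inl h
          · exact Or.inr h
          · exact absurd h hceq
    obtain ⟨L', rv', hEq, hlen', hMk, hND', hMem⟩ :=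
      ih (D ++ [(cx, cy)]) (by simpa using hlen) hH2'
        (by
          intro c hc
          rcases List.mem_append.mp hc with h | h
          · exact hH3 c h
          · rcases List.mem_singleton.mp h with rfl
            exact hReachc)
        (by
          intro c hc ha
          rcases List.mem_append.mp hc with h | h
          · exact hH4 c (List.mem_cons_of_mem _ h) ha
          · have hn : pvNbr (cx, cy) c := by
              simp only [List.mem_cons, List.mem_singleton] at h
              rcases h with rfl | rfl | rfl | rfl | h
              · exact Or.inl rfl
              · exact Or.inr (Or.inl rfl)
              · exact Or.inr (Or.inr (Or.inl rfl))
              · exact Or.inr (Or.inr (Or.inr rfl))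
              · simp at h
            exact Relation.ReflTransGen.tail hReachc ⟨hn, ha⟩)
        (by
          intro d hd c' hn ha
          rcases List.mem_append.mp hd with h | h
          · rcases hH5 d h c' hn ha with h' | h'
            · exact Or.inl (List.mem_append.mpr (Or.inl h'))
            · rcases List.mem_cons.mp h' with rfl | h'
              · exact Or.inl (List.mem_append.mpr (Or.inr (List.mem_singleton.mpr rfl)))
              · exact Or.inr (List.mem_append.mpr (Or.inl h'))
          · rcases List.mem_singleton.mp h with rfl
            exact Or.inr (List.mem_append.mpr (Or.inr (pvNbr_mem_list hn))))
        (by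
          rcases hH6 with h | h
          · exact Or.inl (List.mem_append.mpr (Or.inl h))
          · rcases List.mem_cons.mp h with rfl | h
            · exact Or.inl (List.mem_append.mpr (Or.inr (List.mem_singleton.mpr rfl)))
            · exact Or.inr (List.mem_append.mpr (Or.inl h)))
        (by
          refine List.Nodup.append hND (List.nodup_singleton _) ?_
          intro a ha hb
          rcases List.mem_singleton.mp hb with rfl
          exact hnotold (Or.inr ha))
    refine ⟨(cx, cy) :: L', rv', ?_, hlen', ?_, ?_, ?_⟩
    · rw [pvBfsLoop, if_neg hcond, if_neg hguard, dif_pos hidx]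
      exact hEq
    · intro c hc
      rw [hMk c hc]
      simp only [List.mem_append, List.mem_singleton, List.mem_cons]
      tauto
    · have := hND'
      rwa [List.append_assoc, List.singleton_append] at this
    · intro c
      have := hMem c
      simp only [List.mem_append, List.mem_singleton, List.mem_cons] at this ⊢
      tauto
  | case5 rv st cx cy q' hcond hguard hidx ih =>
    intro D hlen hH2 hH3 hH4 hH5 hH6 hND
    exfalso
    have hInb : pvInb w h_ (cx, cy) := by simp only [pvInb]; omega
    have := pvIdx_bounds hInb
    rw [show pvIdx w (cx, cy) = cy * w + cx from rfl] at this
    omega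

-- decide-wrappers evaluate to the propositions they wrap
theorem pvFirstD_iff {visited : List Bool} {w h_ : Int} {c : Int × Int} :
    pvFirstD visited w h_ c = true ↔ pvIsFirst visited w h_ c := by
  unfold pvFirstD
  exact @decide_eq_true_iff _ (Classical.propDecidable _)

theorem pvMemD_iff {visited : List Bool} {w h_ : Int} {m d : Int × Int} :
    pvMemD visited w h_ m d = true ↔
      pvAvail0 visited w h_ d ∧ pvReach0 visited w h_ m d := by
  unfold pvMemD
  exact @decide_eq_true_iff _ (Classical.propDecidable _)

-- if no reachable cell is in M0, reachability with and without M0 coincide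
theorem pvReach_free {visited : List Bool} {w h_ : Int} {M0 : Int × Int → Prop} {c : Int × Int}
    (hfree : ∀ e, pvReach0 visited w h_ c e → ¬ M0 e) :
    ∀ e, pvReach visited w h_ M0 c e ↔ pvReach0 visited w h_ c e := by
  intro e
  constructor
  · intro h
    induction h with
    | refl => exact Relation.ReflTransGen.refl
    | tail hab hbc ih =>
      exact Relation.ReflTransGen.tail ih ⟨hbc.1, hbc.2.1, hbc.2.2.1, not_false⟩
  · intro h
    induction h with
    | refl => exact Relation.ReflTransGen.refl
    | tail hab hbc ih =>
      exact Relation.ReflTransGen.tail ih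
        ⟨hbc.1, hbc.2.1, hbc.2.2.1, hfree _ (Relation.ReflTransGen.tail hab hbc)⟩

-- a nodup enumeration of the component folds to the canonical entry
theorem pvEntry_of_list {visited : List Bool} {w h_ : Int} {c : Int × Int} {L : List (Int × Int)}
    (hnd : L.Nodup)
    (hmem : ∀ e, e ∈ L ↔ pvAvail0 visited w h_ e ∧ pvReach0 visited w h_ c e) :
    L.foldl pvStep (c.1, c.2, c.1, c.2, 0) = pvEntryC visited w h_ c := by
  unfold pvEntryC pvEntryPre
  have hnd' : ((pvCells w h_).filter (pvMemD visited w h_ c)).Nodup :=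
    (pvCells_nodup w h_).filter _
  have hperm : L.Perm ((pvCells w h_).filter (pvMemD visited w h_ c)) := by
    rw [List.perm_ext_iff_of_nodup hnd hnd']
    intro e
    rw [hmem e, List.mem_filter, pvMemD_iff]
    constructor
    · intro h
      exact ⟨pvCells_mem.mpr h.1.1, h⟩
    · intro h
      exact h.2
  exact @List.Perm.foldl_eq _ _ pvStep _ _ ⟨pvStep_rightComm⟩ hperm _

-- A's scan over the remaining cells extends regions exactly by the canonical emissions
theorem pvScanA_fold (visited : List Bool) (w h_ min_size : Int) :
    ∀ (rest done : List (Int × Int)) (regions : List (List Int)) (rv : List Bool),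
    pvCells w h_ = done ++ rest →
    rv.length = (w * h_).toNat →
    (∀ c, pvInb w h_ c → (rv.getD (pvIdx w c).toNat false = true ↔
        ∃ d ∈ done, pvAvail0 visited w h_ d ∧ pvReach0 visited w h_ d c)) →
    regions = ((done.filter (pvFirstD visited w h_)).map (pvEntryC visited w h_)).foldl
      (pvEmit min_size) [] →
    (rest.foldl (fun acc c => pvScanA visited w h_ min_size acc c.2 c.1) (regions, rv)).1
      = (((done ++ rest).filter (pvFirstD visited w h_)).map (pvEntryC visited w h_)).foldl
          (pvEmit min_size) [] := by
  intro rest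
  induction rest with
  | nil =>
    intro done regions rv hsplit hlen hmark hreg
    simpa using hreg
  | cons c rest' ih =>
    intro done regions rv hsplit hlen hmark hreg
    have hcInb : pvInb w h_ c := pvCells_mem.mp (by
      rw [hsplit]
      exact List.mem_append.mpr (Or.inr List.mem_cons_self))
    have hsplit' : pvCells w h_ = (done ++ [c]) ++ rest' := by
      rw [hsplit, List.append_assoc, List.singleton_append]
    have hguard : (c.2 * w + c.1 : Int) = pvIdx w c := rfl
    by_cases hv : visited.getD (pvIdx w c).toNat false = true
    · -- background pixel: both sides skip it
      have hstep : pvScanA visited w h_ min_size (regions, rv) c.2 c.1 = (regions, rv) := by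
        unfold pvScanA
        rw [if_pos (by rw [hguard, hv]; simp)]
      have hnav : ¬ pvAvail0 visited w h_ c := fun h => by
        rw [h.2.1] at hv; exact Bool.false_ne_true hv
      rw [List.foldl_cons, hstep]
      rw [ih (done ++ [c]) regions rv hsplit' hlen
        (by
          intro e he
          rw [hmark e he]
          constructor
          · rintro ⟨d, hd, hav, hr⟩
            exact ⟨d, List.mem_append.mpr (Or.inl hd), hav, hr⟩
          · rintro ⟨d, hd, hav, hr⟩
            rcases List.mem_append.mp hd with h | h
            · exact ⟨d, h, hav, hr⟩
            · rcases List.mem_singleton.mp h with rfl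
              exact absurd hav hnav)
        (by
          rw [hreg, List.filter_append]
          have : pvFirstD visited w h_ c = false := by
            rw [Bool.eq_false_iff]
            intro h
            exact hnav (pvFirstD_iff.mp h).1
          simp [this])]
      rw [List.append_assoc, List.singleton_append]
    · have hv' : visited.getD (pvIdx w c).toNat false = false := by
        simpa using hv
      have hcav : pvAvail0 visited w h_ c := ⟨hcInb, hv', not_false⟩
      by_cases hm : rv.getD (pvIdx w c).toNat false = true
      · -- already swallowed by an earlier component: skip, and c is not a first cell
        obtain ⟨d, hd, hdav, hdr⟩ := (hmark c hcInb).mp hm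
        have hstep : pvScanA visited w h_ min_size (regions, rv) c.2 c.1 = (regions, rv) := by
          unfold pvScanA
          rw [if_pos (by rw [hguard, hm]; simp)]
        have hnf : ¬ pvIsFirst visited w h_ c := by
          rintro ⟨_, hmin⟩
          have h1 := hmin d hdav (pvReach0_symm hdav hdr)
          have h2 := pvCells_done_lt hsplit hd
          omega
        rw [List.foldl_cons, hstep]
        rw [ih (done ++ [c]) regions rv hsplit' hlen
          (by
            intro e he
            rw [hmark e he]
            constructor
            · rintro ⟨d', hd', hav, hr⟩
              exact ⟨d', List.mem_append.mpr (Or.inl hd'), hav, hr⟩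
            · rintro ⟨d', hd', hav, hr⟩
              rcases List.mem_append.mp hd' with h | h
              · exact ⟨d', h, hav, hr⟩
              · rcases List.mem_singleton.mp h with rfl
                exact ⟨d, hd, hdav, pvReach0_trans hdr hr⟩)
          (by
            rw [hreg, List.filter_append]
            have : pvFirstD visited w h_ c = false := by
              rw [Bool.eq_false_iff]
              intro h
              exact hnf (pvFirstD_iff.mp h)
            simp [this])]
        rw [List.append_assoc, List.singleton_append]
      · -- fresh seed: A floods the whole component here
        have hm' : rv.getD (pvIdx w c).toNat false = false := by
          simpa using hm
        have hsM : pvAvail visited w h_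
            (fun e => rv.getD (pvIdx w e).toNat false = true) c :=
          ⟨hcInb, hv', hm⟩
        obtain ⟨L, rv', hEq, hlen', hMk, hND, hMemL⟩ :=
          pvBfs_spec visited w h_ (fun e => rv.getD (pvIdx w e).toNat false = true) c hsM
            rv [c] (c.1, c.2, c.1, c.2, 0) [] hlen
            (by intro e he; simp)
            (by intro e he; simp at he)
            (by
              intro e he _
              rcases List.mem_singleton.mp he with rfl
              exact Relation.ReflTransGen.refl)
            (by intro d hd; simp at hd)
            (Or.inr (List.mem_singleton.mpr rfl))
            List.nodup_nil
        have hfree : ∀ e, pvReach0 visited w h_ c e →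
            ¬ rv.getD (pvIdx w e).toNat false = true := by
          intro e he hM0e
          have heav : pvAvail0 visited w h_ e := pvReach0_avail hcav he
          obtain ⟨d, hd, hdav, hdr⟩ := (hmark e heav.1).mp hM0e
          have : rv.getD (pvIdx w c).toNat false = true :=
            (hmark c hcInb).mpr ⟨d, hd, hdav, pvReach0_trans hdr (pvReach0_symm hcav he)⟩
          exact hm this
        have hMemL0 : ∀ e, e ∈ L ↔ pvReach0 visited w h_ c e := by
          intro e
          rw [show (e ∈ L) ↔ (e ∈ ([] : List (Int × Int)) ∨ e ∈ L) by simp, hMemL e]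
          exact pvReach_free hfree e
        have hFirst : pvIsFirst visited w h_ c := by
          refine ⟨hcav, ?_⟩
          intro d hdav hr
          by_contra hlt
          push_neg at hlt
          have hd : d ∈ done := pvCells_earlier hsplit hdav.1 hlt
          exact hm ((hmark c hcInb).mpr ⟨d, hd, hdav, pvReach0_symm hcav hr⟩)
        have hEntry : L.foldl pvStep (c.1, c.2, c.1, c.2, 0) = pvEntryC visited w h_ c :=
          pvEntry_of_list (by simpa using hND)
            (fun e => by
              rw [hMemL0 e]
              constructor
              · intro h
                exact ⟨pvReach0_avail hcav h, h⟩
              · intro h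
                exact h.2)
        have hstep : pvScanA visited w h_ min_size (regions, rv) c.2 c.1 =
            (pvEmit min_size regions (pvEntryC visited w h_ c), rv') := by
          unfold pvScanA
          rw [if_neg (by rw [hguard]; rw [hv', hm']; simp)]
          have hq : [((c.1 : Int), (c.2 : Int))] = [c] := by simp
          have hb : pvBfsLoop visited w h_ rv [c] (c.1, c.2, c.1, c.2, 0) =
              (rv', pvEntryC visited w h_ c) := by rw [hEq, hEntry]
          simp only [hq, hb]
          unfold pvEmit
          split_ifs <;> rfl
        rw [List.foldl_cons, hstep]
        rw [ih (done ++ [c]) _ rv' hsplit' hlen'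
          (by
            intro e he
            rw [hMk e he]
            constructor
            · rintro (h | h | h)
              · obtain ⟨d, hd, hdav, hdr⟩ := (hmark e he).mp h
                exact ⟨d, List.mem_append.mpr (Or.inl hd), hdav, hdr⟩
              · simp at h
              · exact ⟨c, List.mem_append.mpr (Or.inr (List.mem_singleton.mpr rfl)), hcav,
                  (hMemL0 e).mp h⟩
            · rintro ⟨d, hd, hdav, hdr⟩
              rcases List.mem_append.mp hd with h | h
              · exact Or.inl ((hmark e he).mpr ⟨d, h, hdav, hdr⟩)
              · rcases List.mem_singleton.mp h with rfl
                exact Or.inr (Or.inr ((hMemL0 e).mpr hdr)))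
          (by
            rw [hreg, List.filter_append]
            have hft : pvFirstD visited w h_ c = true := pvFirstD_iff.mpr hFirst
            simp only [hft, List.filter_cons, List.filter_nil, if_pos]
            rw [List.map_append, List.foldl_append]
            simp [pvEmit])]
        rw [List.append_assoc, List.singleton_append]

-- Port A computes the canonical region list
theorem pvA_canon (visited : List Bool) (w h_ min_size : Int) :
    find_sprite_regions visited w h_ min_size = pvCanon visited w h_ min_size := by
  unfold find_sprite_regions pvCanon
  rw [pvFold_cells w h_ (fun acc y x => pvScanA visited w h_ min_size acc y x)]
  have hrep : ∀ k : Nat, (List.replicate (w * h_).toNat false).getD k false = false := by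
    intro k
    rw [List.getD_eq_getElem?_getD, List.getElem?_replicate]
    split <;> simp
  have := pvScanA_fold visited w h_ min_size (pvCells w h_) [] []
    (List.replicate (w * h_).toNat false) (by simp) (by simp)
    (by
      intro e he
      rw [hrep]
      constructor
      · intro h
        exact absurd h (by simp)
      · rintro ⟨d, hd, _⟩
        simp at hd)
    (by simp)
  simpa using this

-- ---- union-find theory for B's parent array ----
def pvValidP (P : List Int) : Prop :=
  ∀ i : Nat, i < P.length → 0 ≤ P.getD i 0 ∧ P.getD i 0 ≤ (i : Int)

def pvRho (P : List Int) (i : Int) : Int := pvFind P P.length i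

theorem pvFind_succ (P : List Int) (fuel : Nat) (i : Int) :
    pvFind P (fuel + 1) i =
      if P.getD i.toNat 0 = i then i else pvFind P fuel (P.getD i.toNat 0) := rfl

theorem pvGetD_set_self {P : List Int} {k : Nat} (hk : k < P.length) (v : Int) :
    (P.set k v).getD k 0 = v := by
  rw [List.getD_eq_getElem?_getD, List.getElem?_set_self hk]
  rfl

theorem pvGetD_set_ne {P : List Int} {k j : Nat} (hne : j ≠ k) (v : Int) :
    (P.set k v).getD j 0 = P.getD j 0 := by
  rw [List.getD_eq_getElem?_getD, List.getElem?_set_ne (by omega), ← List.getD_eq_getElem?_getD]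

-- the fuel does not matter once it exceeds the start index (parent pointers strictly decrease)
theorem pvFind_fuel {P : List Int} (hV : pvValidP P) :
    ∀ k : Nat, k < P.length → ∀ f1 f2 : Nat, k < f1 → k < f2 →
      pvFind P f1 (k : Int) = pvFind P f2 (k : Int) := by
  intro k
  induction k using Nat.strong_induction_on with
  | _ k IH =>
    intro hk f1 f2 hf1 hf2
    obtain ⟨a, rfl⟩ : ∃ a, f1 = a + 1 := ⟨f1 - 1, by omega⟩
    obtain ⟨b, rfl⟩ : ∃ b, f2 = b + 1 := ⟨f2 - 1, by omega⟩
    rw [pvFind_succ, pvFind_succ]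
    have htn : ((k : Int)).toNat = k := Int.toNat_natCast k
    rw [htn]
    by_cases hp : P.getD k 0 = (k : Int)
    · rw [if_pos hp, if_pos hp]
    · rw [if_neg hp, if_neg hp]
      obtain ⟨h0, hle⟩ := hV k hk
      have hlt : (P.getD k 0).toNat < k := by omega
      have hcast : ((P.getD k 0).toNat : Int) = P.getD k 0 := Int.toNat_of_nonneg h0
      rw [← hcast]
      exact IH _ hlt (by omega) a b (by omega) (by omega)

theorem pvFind_fuel' {P : List Int} (hV : pvValidP P) {i : Int} (h0 : 0 ≤ i)
    (hi : i.toNat < P.length) {f1 f2 : Nat} (hf1 : i.toNat < f1) (hf2 : i.toNat < f2) :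
    pvFind P f1 i = pvFind P f2 i := by
  have hcast : ((i.toNat : Nat) : Int) = i := Int.toNat_of_nonneg h0
  rw [← hcast]
  exact pvFind_fuel hV i.toNat hi f1 f2 hf1 hf2

-- pvRho lands on a root at most as large as its argument
theorem pvRho_spec {P : List Int} (hV : pvValidP P) :
    ∀ i : Int, 0 ≤ i → i.toNat < P.length →
      ∃ r : Nat, pvRho P i = (r : Int) ∧ (r : Int) ≤ i ∧ r < P.length ∧ P.getD r 0 = (r : Int) := by
  intro i h0 hi
  generalize hm : i.toNat = m
  induction m using Nat.strong_induction_on generalizing i with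
  | _ m IH =>
    subst hm
    obtain ⟨a, hlen⟩ : ∃ a, P.length = a + 1 := ⟨P.length - 1, by omega⟩
    have hunf : pvRho P i =
        if P.getD i.toNat 0 = i then i else pvFind P a (P.getD i.toNat 0) := by
      unfold pvRho
      rw [hlen]
      rfl
    rw [hunf]
    by_cases hp : P.getD i.toNat 0 = i
    · refine ⟨i.toNat, ?_, by omega, hi, ?_⟩
      · rw [if_pos hp, Int.toNat_of_nonneg h0]
      · rw [Int.toNat_of_nonneg h0]
        exact hp
    · rw [if_neg hp]
      obtain ⟨hp0, hple⟩ := hV i.toNat hi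
      have hplt : (P.getD i.toNat 0).toNat < i.toNat := by omega
      have hre : pvFind P a (P.getD i.toNat 0) = pvFind P P.length (P.getD i.toNat 0) :=
        pvFind_fuel' hV hp0 (by omega) (by omega) (by omega)
      obtain ⟨r, hr1, hr2, hr3, hr4⟩ := IH _ hplt (P.getD i.toNat 0) hp0 (by omega) rfl
      refine ⟨r, ?_, by omega, hr3, hr4⟩
      rw [hre]
      exact hr1

theorem pvRho_root {P : List Int} (hV : pvValidP P) {r : Nat} (hr : r < P.length)
    (hroot : P.getD r 0 = (r : Int)) : pvRho P (r : Int) = (r : Int) := by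
  obtain ⟨a, hlen⟩ : ∃ a, P.length = a + 1 := ⟨P.length - 1, by omega⟩
  show pvFind P P.length (r : Int) = (r : Int)
  rw [hlen, pvFind_succ, Int.toNat_natCast, if_pos hroot]

theorem pvRho_step {P : List Int} (hV : pvValidP P) {i : Int} (h0 : 0 ≤ i)
    (hi : i.toNat < P.length) (hne : P.getD i.toNat 0 ≠ i) :
    pvRho P i = pvRho P (P.getD i.toNat 0) := by
  obtain ⟨a, hlen⟩ : ∃ a, P.length = a + 1 := ⟨P.length - 1, by omega⟩
  obtain ⟨hp0, hple⟩ := hV i.toNat hi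
  show pvFind P P.length i = pvFind P P.length (P.getD i.toNat 0)
  conv_lhs => rw [hlen, pvFind_succ]
  rw [if_neg hne]
  exact pvFind_fuel' hV hp0 (by omega) (by omega)
    (by
      have : (P.getD i.toNat 0).toNat < i.toNat := by omega
      omega)

-- re-rooting one root: every pvRho value is rewritten through the new link
theorem pvRho_set {P : List Int} (hV : pvValidP P) {ra rb : Nat} (hab : ra < rb)
    (hrb : rb < P.length) (hroota : P.getD ra 0 = (ra : Int)) (hrootb : P.getD rb 0 = (rb : Int)) :
    ∀ i : Int, 0 ≤ i → i.toNat < P.length →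
      pvRho (P.set rb (ra : Int)) i =
        if pvRho P i = (rb : Int) then (ra : Int) else pvRho P i := by
  have hlen' : (P.set rb (ra : Int)).length = P.length := List.length_set ..
  have hV' : pvValidP (P.set rb (ra : Int)) := by
    intro j hj
    rw [hlen'] at hj
    by_cases hje : j = rb
    · subst hje
      rw [pvGetD_set_self hrb]
      constructor
      · positivity
      · exact_mod_cast hab.le
    · rw [pvGetD_set_ne hje]
      exact hV j hj
  intro i h0 hi
  generalize hm : i.toNat = m
  induction m using Nat.strong_induction_on generalizing i with
  | _ m IH =>
    subst hm
    by_cases hieq : i.toNat = rb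
    · have hieq' : i = (rb : Int) := by omega
      subst hieq'
      have h1 : (P.set rb (ra : Int)).getD ((rb : Int)).toNat 0 = (ra : Int) := by
        rw [Int.toNat_natCast]
        exact pvGetD_set_self hrb _
      have hstep : pvRho (P.set rb (ra : Int)) (rb : Int) =
          pvRho (P.set rb (ra : Int)) (ra : Int) := by
        rw [pvRho_step hV' (by positivity) (by rw [hlen', Int.toNat_natCast]; exact hrb)
            (by
              rw [h1]
              intro h
              have : ra = rb := by exact_mod_cast h
              omega), h1]
      have hroot' : pvRho (P.set rb (ra : Int)) (ra : Int) = (ra : Int) :=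
        pvRho_root hV' (by rw [hlen']; omega)
          (by rw [pvGetD_set_ne (by omega : ra ≠ rb)]; exact hroota)
      rw [hstep, hroot', pvRho_root hV hrb hrootb, if_pos rfl]
    · have hgd : (P.set rb (ra : Int)).getD i.toNat 0 = P.getD i.toNat 0 :=
        pvGetD_set_ne hieq (ra : Int)
      by_cases hp : P.getD i.toNat 0 = i
      · have hroot1 : (P.set rb (ra : Int)).getD i.toNat 0 = ((i.toNat : Nat) : Int) := by
          rw [hgd, Int.toNat_of_nonneg h0]
          exact hp
        have hroot2 : P.getD i.toNat 0 = ((i.toNat : Nat) : Int) := by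
          rw [Int.toNat_of_nonneg h0]
          exact hp
        have hr1 := pvRho_root hV' (r := i.toNat) (by rw [hlen']; omega) hroot1
        have hr2 := pvRho_root hV (r := i.toNat) (by omega) hroot2
        rw [Int.toNat_of_nonneg h0] at hr1 hr2
        rw [hr1, hr2, if_neg (show i ≠ (rb : Int) by intro h; apply hieq; omega)]
      · obtain ⟨hp0, hple⟩ := hV i.toNat hi
        have hplt : (P.getD i.toNat 0).toNat < i.toNat := by omega
        rw [pvRho_step hV' h0 (by omega) (by rw [hgd]; exact hp), hgd,
          pvRho_step hV h0 hi hp]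
        exact IH _ hplt _ hp0 (by omega) rfl

-- one union step: classes of a and b merge onto the smaller root, everything else unchanged
theorem pvUnion_spec {P : List Int} (hV : pvValidP P) (a b : Int)
    (ha0 : 0 ≤ a) (ha : a.toNat < P.length) (hb0 : 0 ≤ b) (hb : b.toNat < P.length) :
    pvValidP (pvUnion P a b) ∧ (pvUnion P a b).length = P.length ∧
    ∀ k : Int, 0 ≤ k → k.toNat < P.length →
      pvRho (pvUnion P a b) k =
        if pvRho P k = pvRho P a ∨ pvRho P k = pvRho P b
        then min (pvRho P a) (pvRho P b) else pvRho P k := by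
  obtain ⟨Ra, hra1, hra2, hra3, hra4⟩ := pvRho_spec hV a ha0 ha
  obtain ⟨Rb, hrb1, hrb2, hrb3, hrb4⟩ := pvRho_spec hV b hb0 hb
  have hfa : pvFind P P.length a = pvRho P a := rfl
  have hfb : pvFind P P.length b = pvRho P b := rfl
  rcases lt_trichotomy Ra Rb with hlt | heq | hgt
  · have hne : pvRho P a ≠ pvRho P b := by rw [hra1, hrb1]; exact_mod_cast Nat.ne_of_lt hlt
    have hsel : pvUnion P a b = P.set ((pvRho P b).toNat) (pvRho P a) := by
      unfold pvUnion
      rw [hfa, hfb, if_neg hne, if_pos (by rw [hra1, hrb1]; exact_mod_cast hlt)]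
    have htn : (pvRho P b).toNat = Rb := by rw [hrb1]; exact Int.toNat_natCast Rb
    rw [hsel, htn, hra1]
    have hset := pvRho_set hV hlt hrb3 hra4 hrb4
    have hV' : pvValidP (P.set Rb (Ra : Int)) := by
      intro j hj
      rw [List.length_set] at hj
      by_cases hje : j = Rb
      · subst hje
        rw [pvGetD_set_self hrb3]
        constructor
        · positivity
        · exact_mod_cast hlt.le
      · rw [pvGetD_set_ne hje]
        exact hV j hj
    refine ⟨hV', List.length_set .., ?_⟩
    intro k hk0 hk
    rw [hset k hk0 hk, hrb1]
    have hmin : min ((Ra : Int)) ((Rb : Int)) = (Ra : Int) :=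
      min_eq_left (by exact_mod_cast hlt.le)
    by_cases h1 : pvRho P k = (Rb : Int)
    · rw [if_pos h1, if_pos (Or.inr h1), hmin]
    · rw [if_neg h1]
      by_cases h2 : pvRho P k = (Ra : Int)
      · rw [if_pos (Or.inl h2), hmin, h2]
      · rw [if_neg (by rintro (h | h); exacts [h2 h, h1 h])]
  · have heq' : pvRho P a = pvRho P b := by rw [hra1, hrb1, heq]
    have hsel : pvUnion P a b = P := by
      unfold pvUnion
      rw [hfa, hfb, if_pos heq']
    rw [hsel]
    refine ⟨hV, rfl, ?_⟩
    intro k hk0 hk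
    rw [heq']
    by_cases h1 : pvRho P k = pvRho P b
    · rw [if_pos (Or.inl h1), min_self, h1]
    · rw [if_neg (by rintro (h | h) <;> exact h1 h)]
  · have hne : pvRho P a ≠ pvRho P b := by rw [hra1, hrb1]; exact_mod_cast (Nat.ne_of_lt hgt).symm
    have hnlt : ¬ pvRho P a < pvRho P b := by rw [hra1, hrb1]; exact_mod_cast not_lt.mpr hgt.le
    have hsel : pvUnion P a b = P.set ((pvRho P a).toNat) (pvRho P b) := by
      unfold pvUnion
      rw [hfa, hfb, if_neg hne, if_neg hnlt]
    have htn : (pvRho P a).toNat = Ra := by rw [hra1]; exact Int.toNat_natCast Ra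
    rw [hsel, htn, hrb1]
    have hset := pvRho_set hV hgt hra3 hrb4 hra4
    have hV' : pvValidP (P.set Ra (Rb : Int)) := by
      intro j hj
      rw [List.length_set] at hj
      by_cases hje : j = Ra
      · subst hje
        rw [pvGetD_set_self hra3]
        constructor
        · positivity
        · exact_mod_cast hgt.le
      · rw [pvGetD_set_ne hje]
        exact hV j hj
    refine ⟨hV', List.length_set .., ?_⟩
    intro k hk0 hk
    rw [hset k hk0 hk, hra1]
    have hmin : min ((Ra : Int)) ((Rb : Int)) = (Rb : Int) :=
      min_eq_right (by exact_mod_cast hgt.le)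
    by_cases h1 : pvRho P k = (Ra : Int)
    · rw [if_pos h1, if_pos (Or.inl h1), hmin]
    · rw [if_neg h1]
      by_cases h2 : pvRho P k = (Rb : Int)
      · rw [if_pos (Or.inr h2), hmin, h2]
      · rw [if_neg (by rintro (h | h); exacts [h1 h, h2 h])]

-- the initial parent array: every index is its own root
theorem pvP0_getD (n : Nat) (i : Nat) (hi : i < n) :
    ((List.range n).map Int.ofNat).getD i 0 = (i : Int) := by
  exact PySem.List.getD_map_range Int.ofNat n i 0 hi

theorem pvP0_length (n : Nat) : ((List.range n).map Int.ofNat).length = n := by simp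

theorem pvP0_valid (n : Nat) : pvValidP ((List.range n).map Int.ofNat) := by
  intro i hi
  rw [pvP0_length] at hi
  rw [pvP0_getD n i hi]
  omega

theorem pvP0_rho (n : Nat) (i : Nat) (hi : i < n) :
    pvRho ((List.range n).map Int.ofNat) (i : Int) = (i : Int) :=
  pvRho_root (pvP0_valid n) (by rw [pvP0_length]; exact hi) (pvP0_getD n i hi)

-- ---- pass 1: the final parent forest's classes are exactly the connected components ----
theorem pvIdx_toNat_lt {w h_ : Int} {c : Int × Int} (hc : pvInb w h_ c) :
    (pvIdx w c).toNat < (w * h_).toNat := by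
  have := pvIdx_bounds hc
  omega

theorem pvAvail0_mk {visited : List Bool} {w h_ : Int} {c : Int × Int}
    (hinb : pvInb w h_ c) (hvis : visited.getD (pvIdx w c).toNat false = false) :
    pvAvail0 visited w h_ c := ⟨hinb, hvis, fun h => h⟩

theorem pvIdxB {w h_ x y : Int} (hx : 0 ≤ x ∧ x < w) (hy : 0 ≤ y ∧ y < h_) :
    (0 : Int) ≤ y * w + x ∧ y * w + x < w * h_ := by
  have hw : (0 : Int) < w := lt_of_le_of_lt hx.1 hx.2
  constructor
  · nlinarith [mul_nonneg hy.1 hw.le]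
  · nlinarith [hx.1, hx.2, hy.1, hy.2]

def pvInv1 (visited : List Bool) (w h_ : Int) (P : List Int) : Prop :=
  pvValidP P ∧ P.length = (w * h_).toNat ∧
  ∀ c d, pvInb w h_ c → pvInb w h_ d →
    pvRho P (pvIdx w c) = pvRho P (pvIdx w d) →
    c = d ∨ (pvAvail0 visited w h_ c ∧ pvReach0 visited w h_ c d)

theorem pvConn_glue {visited : List Bool} {w h_ : Int} {x u y v : Int × Int}
    (hx : x = u ∨ (pvAvail0 visited w h_ x ∧ pvReach0 visited w h_ x u))
    (hy : y = v ∨ (pvAvail0 visited w h_ y ∧ pvReach0 visited w h_ y v))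
    (hu : pvAvail0 visited w h_ u) (hv : pvAvail0 visited w h_ v)
    (huv : pvReach0 visited w h_ u v) :
    pvAvail0 visited w h_ x ∧ pvReach0 visited w h_ x y := by
  have hx' : pvAvail0 visited w h_ x ∧ pvReach0 visited w h_ x u := by
    rcases hx with rfl | hx
    · exact ⟨hu, Relation.ReflTransGen.refl⟩
    · exact hx
  have hy' : pvAvail0 visited w h_ y ∧ pvReach0 visited w h_ y v := by
    rcases hy with rfl | hy
    · exact ⟨hv, Relation.ReflTransGen.refl⟩
    · exact hy
  exact ⟨hx'.1, pvReach0_trans (pvReach0_trans hx'.2 huv) (pvReach0_symm hy'.1 hy'.2)⟩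

-- unioning two connected available cells keeps the class invariant
theorem pvUnion_inv1 {visited : List Bool} {w h_ : Int} {P : List Int}
    (hInv : pvInv1 visited w h_ P) {c c' : Int × Int}
    (hc : pvAvail0 visited w h_ c) (hc' : pvAvail0 visited w h_ c')
    (hr : pvReach0 visited w h_ c c') :
    pvInv1 visited w h_ (pvUnion P (pvIdx w c) (pvIdx w c')) := by
  obtain ⟨hV, hlen, hcls⟩ := hInv
  have hcb := pvIdx_bounds hc.1
  have hcb' := pvIdx_bounds hc'.1
  obtain ⟨hV', hlen', hform⟩ := pvUnion_spec hV (pvIdx w c) (pvIdx w c')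
    hcb.1 (by rw [hlen]; exact pvIdx_toNat_lt hc.1)
    hcb'.1 (by rw [hlen]; exact pvIdx_toNat_lt hc'.1)
  refine ⟨hV', by rw [hlen', hlen], ?_⟩
  intro x y hx hy hxy
  have hxb := pvIdx_bounds hx
  have hyb := pvIdx_bounds hy
  rw [hform (pvIdx w x) hxb.1 (by rw [hlen]; exact pvIdx_toNat_lt hx),
    hform (pvIdx w y) hyb.1 (by rw [hlen]; exact pvIdx_toNat_lt hy)] at hxy
  by_cases hcx : pvRho P (pvIdx w x) = pvRho P (pvIdx w c) ∨
      pvRho P (pvIdx w x) = pvRho P (pvIdx w c')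
  · by_cases hcy : pvRho P (pvIdx w y) = pvRho P (pvIdx w c) ∨
        pvRho P (pvIdx w y) = pvRho P (pvIdx w c')
    · refine Or.inr ?_
      rcases hcx with h1 | h1 <;> rcases hcy with h2 | h2
      · exact pvConn_glue (hcls x c hx hc.1 h1) (hcls y c hy hc.1 h2) hc hc
          Relation.ReflTransGen.refl
      · exact pvConn_glue (hcls x c hx hc.1 h1) (hcls y c' hy hc'.1 h2) hc hc' hr
      · exact pvConn_glue (hcls x c' hx hc'.1 h1) (hcls y c hy hc.1 h2) hc' hc
          (pvReach0_symm hc hr)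
      · exact pvConn_glue (hcls x c' hx hc'.1 h1) (hcls y c' hy hc'.1 h2) hc' hc'
          Relation.ReflTransGen.refl
    · exfalso
      rw [if_pos hcx, if_neg hcy] at hxy
      rcases min_choice (pvRho P (pvIdx w c)) (pvRho P (pvIdx w c')) with h | h <;>
        rw [h] at hxy
      · exact hcy (Or.inl hxy.symm)
      · exact hcy (Or.inr hxy.symm)
  · by_cases hcy : pvRho P (pvIdx w y) = pvRho P (pvIdx w c) ∨
        pvRho P (pvIdx w y) = pvRho P (pvIdx w c')
    · exfalso
      rw [if_neg hcx, if_pos hcy] at hxy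
      rcases min_choice (pvRho P (pvIdx w c)) (pvRho P (pvIdx w c')) with h | h <;>
        rw [h] at hxy
      · exact hcx (Or.inl hxy)
      · exact hcx (Or.inr hxy)
    · rw [if_neg hcx, if_neg hcy] at hxy
      exact hcls x y hx hy hxy

-- one pass-1 body step keeps the class invariant
theorem pvCell1_inv1 {visited : List Bool} {w h_ : Int} {P : List Int}
    (hInv : pvInv1 visited w h_ P) {y x : Int}
    (hx : 0 ≤ x ∧ x < w) (hy : 0 ≤ y ∧ y < h_) :
    pvInv1 visited w h_ (pvCell1 visited w h_ P y x) := by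
  unfold pvCell1
  by_cases hv : visited.getD (y * w + x).toNat false = true
  · rw [if_pos hv]
    exact hInv
  · rw [if_neg hv]
    have hcav : pvAvail0 visited w h_ (x, y) :=
      pvAvail0_mk ⟨hx.1, hx.2, hy.1, hy.2⟩ (by simpa using hv)
    have hidx : (y * w + x : Int) = pvIdx w (x, y) := rfl
    by_cases hg1 : x + 1 < w ∧ visited.getD (y * w + x + 1).toNat false = false
    · rw [if_pos hg1]
      have hidx1 : (y * w + x + 1 : Int) = pvIdx w (x + 1, y) := by
        unfold pvIdx
        ring
      have hcav1 : pvAvail0 visited w h_ (x + 1, y) :=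
        pvAvail0_mk ⟨by omega, hg1.1, hy.1, hy.2⟩
          (by rw [show pvIdx w (x + 1, y) = y * w + x + 1 from by unfold pvIdx; ring]
              exact hg1.2)
      have hr1 : pvReach0 visited w h_ (x, y) (x + 1, y) :=
        pvReach0_single (Or.inl rfl) hcav1
      have hInv1 : pvInv1 visited w h_ (pvUnion P (y * w + x) (y * w + x + 1)) := by
        rw [hidx1, hidx]
        exact pvUnion_inv1 hInv hcav hcav1 hr1
      by_cases hg2 : y + 1 < h_ ∧ visited.getD (y * w + x + w).toNat false = false
      · rw [if_pos hg2]
        have hidx2 : (y * w + x + w : Int) = pvIdx w (x, y + 1) := by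
          unfold pvIdx
          ring
        have hcav2 : pvAvail0 visited w h_ (x, y + 1) :=
          pvAvail0_mk ⟨hx.1, hx.2, by omega, hg2.1⟩
            (by rw [show pvIdx w (x, y + 1) = y * w + x + w from by unfold pvIdx; ring]
                exact hg2.2)
        have hr2 : pvReach0 visited w h_ (x, y) (x, y + 1) :=
          pvReach0_single (Or.inr (Or.inr (Or.inl rfl))) hcav2
        rw [hidx2, hidx]
        exact pvUnion_inv1 hInv1 hcav hcav2 hr2
      · rw [if_neg hg2]
        exact hInv1
    · rw [if_neg hg1]
      by_cases hg2 : y + 1 < h_ ∧ visited.getD (y * w + x + w).toNat false = false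
      · rw [if_pos hg2]
        have hidx2 : (y * w + x + w : Int) = pvIdx w (x, y + 1) := by
          unfold pvIdx
          ring
        have hcav2 : pvAvail0 visited w h_ (x, y + 1) :=
          pvAvail0_mk ⟨hx.1, hx.2, by omega, hg2.1⟩
            (by rw [show pvIdx w (x, y + 1) = y * w + x + w from by unfold pvIdx; ring]
                exact hg2.2)
        have hr2 : pvReach0 visited w h_ (x, y) (x, y + 1) :=
          pvReach0_single (Or.inr (Or.inr (Or.inl rfl))) hcav2
        rw [hidx2, hidx]
        exact pvUnion_inv1 hInv hcav hcav2 hr2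
      · rw [if_neg hg2]
        exact hInv

-- a union step never separates cells that already share a root
theorem pvUnion_pres {P : List Int} (hV : pvValidP P) {a b k l : Int}
    (ha0 : 0 ≤ a) (ha : a.toNat < P.length) (hb0 : 0 ≤ b) (hb : b.toNat < P.length)
    (hk0 : 0 ≤ k) (hk : k.toNat < P.length) (hl0 : 0 ≤ l) (hl : l.toNat < P.length)
    (heq : pvRho P k = pvRho P l) :
    pvRho (pvUnion P a b) k = pvRho (pvUnion P a b) l := by
  obtain ⟨_, _, hform⟩ := pvUnion_spec hV a b ha0 ha hb0 hb
  rw [hform k hk0 hk, hform l hl0 hl, heq]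

-- a pass-1 body step never separates cells that already share a root
theorem pvCell1_pres {visited : List Bool} {w h_ : Int} {P : List Int}
    (hV : pvValidP P) (hlen : P.length = (w * h_).toNat) {y x : Int}
    (hx : 0 ≤ x ∧ x < w) (hy : 0 ≤ y ∧ y < h_) {k l : Int}
    (hk0 : 0 ≤ k) (hk : k.toNat < (w * h_).toNat) (hl0 : 0 ≤ l) (hl : l.toNat < (w * h_).toNat)
    (heq : pvRho P k = pvRho P l) :
    pvRho (pvCell1 visited w h_ P y x) k = pvRho (pvCell1 visited w h_ P y x) l := by
  have hb0 : (0 : Int) ≤ y * w + x := (pvIdxB hx hy).1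
  have hb1 : (y * w + x : Int) < w * h_ := (pvIdxB hx hy).2
  unfold pvCell1
  by_cases hv : visited.getD (y * w + x).toNat false = true
  · rw [if_pos hv]
    exact heq
  · rw [if_neg hv]
    by_cases hg1 : x + 1 < w ∧ visited.getD (y * w + x + 1).toNat false = false
    · rw [if_pos hg1]
      have hb1' : (y * w + x + 1 : Int) < w * h_ := by nlinarith [hg1.1, hy.1, hy.2]
      obtain ⟨hV1, hlen1, _⟩ := pvUnion_spec hV (y * w + x) (y * w + x + 1)
        hb0 (by omega) (by omega) (by omega)
      have heq1 := pvUnion_pres hV (a := y * w + x) (b := y * w + x + 1)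
        hb0 (by omega) (by omega) (by omega) hk0 (by omega) hl0 (by omega) heq
      by_cases hg2 : y + 1 < h_ ∧ visited.getD (y * w + x + w).toNat false = false
      · rw [if_pos hg2]
        have hb2 : (y * w + x + w : Int) < w * h_ := by nlinarith [hg2.1, hx.1, hx.2]
        have hw0 : (0 : Int) < w := by omega
        exact pvUnion_pres hV1 (a := y * w + x) (b := y * w + x + w)
          (by omega) (by omega) (by omega) (by omega) hk0 (by omega) hl0 (by omega) heq1
      · rw [if_neg hg2]
        exact heq1
    · rw [if_neg hg1]
      by_cases hg2 : y + 1 < h_ ∧ visited.getD (y * w + x + w).toNat false = false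
      · rw [if_pos hg2]
        have hb2 : (y * w + x + w : Int) < w * h_ := by nlinarith [hg2.1, hx.1, hx.2]
        have hw0 : (0 : Int) < w := by omega
        exact pvUnion_pres hV (a := y * w + x) (b := y * w + x + w)
          hb0 (by omega) (by omega) (by omega) hk0 (by omega) hl0 (by omega) heq
      · rw [if_neg hg2]
        exact heq

theorem pvCell1_VL {visited : List Bool} {w h_ : Int} {P : List Int}
    (hV : pvValidP P) (hlen : P.length = (w * h_).toNat) {y x : Int}
    (hx : 0 ≤ x ∧ x < w) (hy : 0 ≤ y ∧ y < h_) :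
    pvValidP (pvCell1 visited w h_ P y x) ∧
      (pvCell1 visited w h_ P y x).length = (w * h_).toNat := by
  have hb0 : (0 : Int) ≤ y * w + x := (pvIdxB hx hy).1
  have hb1 : (y * w + x : Int) < w * h_ := (pvIdxB hx hy).2
  unfold pvCell1
  by_cases hv : visited.getD (y * w + x).toNat false = true
  · rw [if_pos hv]
    exact ⟨hV, hlen⟩
  · rw [if_neg hv]
    by_cases hg1 : x + 1 < w ∧ visited.getD (y * w + x + 1).toNat false = false
    · rw [if_pos hg1]
      have hb1' : (y * w + x + 1 : Int) < w * h_ := by nlinarith [hg1.1, hy.1, hy.2]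
      obtain ⟨hV1, hlen1, _⟩ := pvUnion_spec hV (y * w + x) (y * w + x + 1)
        hb0 (by omega) (by omega) (by omega)
      by_cases hg2 : y + 1 < h_ ∧ visited.getD (y * w + x + w).toNat false = false
      · rw [if_pos hg2]
        have hb2 : (y * w + x + w : Int) < w * h_ := by nlinarith [hg2.1, hx.1, hx.2]
        have hw0 : (0 : Int) < w := by omega
        obtain ⟨hV2, hlen2, _⟩ := pvUnion_spec hV1 (y * w + x) (y * w + x + w)
          (by omega) (by omega) (by omega) (by omega)
        exact ⟨hV2, by rw [hlen2, hlen1, hlen]⟩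
      · rw [if_neg hg2]
        exact ⟨hV1, by rw [hlen1, hlen]⟩
    · rw [if_neg hg1]
      by_cases hg2 : y + 1 < h_ ∧ visited.getD (y * w + x + w).toNat false = false
      · rw [if_pos hg2]
        have hb2 : (y * w + x + w : Int) < w * h_ := by nlinarith [hg2.1, hx.1, hx.2]
        have hw0 : (0 : Int) < w := by omega
        obtain ⟨hV2, hlen2, _⟩ := pvUnion_spec hV (y * w + x) (y * w + x + w)
          hb0 (by omega) (by omega) (by omega)
        exact ⟨hV2, by rw [hlen2, hlen]⟩
      · rw [if_neg hg2]
        exact ⟨hV, hlen⟩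

theorem pvFold1_VL {visited : List Bool} {w h_ : Int} :
    ∀ (l : List (Int × Int)) (P : List Int), (∀ c ∈ l, pvInb w h_ c) →
    pvValidP P → P.length = (w * h_).toNat →
    pvValidP (l.foldl (fun par c => pvCell1 visited w h_ par c.2 c.1) P) ∧
      (l.foldl (fun par c => pvCell1 visited w h_ par c.2 c.1) P).length = (w * h_).toNat := by
  intro l
  induction l with
  | nil => intro P _ hV hlen; exact ⟨hV, hlen⟩
  | cons c t ih =>
    intro P hmem hV hlen
    have hc := hmem c List.mem_cons_self
    obtain ⟨hV', hlen'⟩ := pvCell1_VL hV hlen ⟨hc.1, hc.2.1⟩ ⟨hc.2.2.1, hc.2.2.2⟩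
    exact ih _ (fun d hd => hmem d (List.mem_cons_of_mem _ hd)) hV' hlen'

theorem pvFold1_pres {visited : List Bool} {w h_ : Int} :
    ∀ (l : List (Int × Int)) (P : List Int), (∀ c ∈ l, pvInb w h_ c) →
    pvValidP P → P.length = (w * h_).toNat →
    ∀ {k l' : Int}, 0 ≤ k → k.toNat < (w * h_).toNat → 0 ≤ l' → l'.toNat < (w * h_).toNat →
    pvRho P k = pvRho P l' →
    pvRho (l.foldl (fun par c => pvCell1 visited w h_ par c.2 c.1) P) k =
      pvRho (l.foldl (fun par c => pvCell1 visited w h_ par c.2 c.1) P) l' := by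
  intro l
  induction l with
  | nil =>
    intro P _ _ _
    intro k l' _ _ _ _ h
    exact h
  | cons c t ih =>
    intro P hmem hV hlen k l' hk0 hk hl0 hl heq
    have hc := hmem c List.mem_cons_self
    obtain ⟨hV', hlen'⟩ := pvCell1_VL hV hlen ⟨hc.1, hc.2.1⟩ ⟨hc.2.2.1, hc.2.2.2⟩
    exact ih _ (fun d hd => hmem d (List.mem_cons_of_mem _ hd)) hV' hlen' hk0 hk hl0 hl
      (pvCell1_pres hV hlen ⟨hc.1, hc.2.1⟩ ⟨hc.2.2.1, hc.2.2.2⟩ hk0 hk hl0 hl heq)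

theorem pvPass1_eq_fold (visited : List Bool) (w h_ : Int) :
    pvPass1 visited w h_ =
      (pvCells w h_).foldl (fun par c => pvCell1 visited w h_ par c.2 c.1)
        ((List.range (w * h_).toNat).map Int.ofNat) := by
  unfold pvPass1
  exact pvFold_cells w h_ (fun par y x => pvCell1 visited w h_ par y x) _

theorem pvFold1_inv1 {visited : List Bool} {w h_ : Int} :
    ∀ (l : List (Int × Int)) (P : List Int), (∀ c ∈ l, pvInb w h_ c) →
    pvInv1 visited w h_ P →
    pvInv1 visited w h_ (l.foldl (fun par c => pvCell1 visited w h_ par c.2 c.1) P) := by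
  intro l
  induction l with
  | nil => intro P _ h; exact h
  | cons c t ih =>
    intro P hmem hInv
    have hc := hmem c List.mem_cons_self
    exact ih _ (fun d hd => hmem d (List.mem_cons_of_mem _ hd))
      (pvCell1_inv1 hInv ⟨hc.1, hc.2.1⟩ ⟨hc.2.2.1, hc.2.2.2⟩)

theorem pvP0_inv1 (visited : List Bool) (w h_ : Int) :
    pvInv1 visited w h_ ((List.range (w * h_).toNat).map Int.ofNat) := by
  refine ⟨pvP0_valid _, pvP0_length _, ?_⟩
  intro c d hc hd hcd
  have hcb := pvIdx_bounds hc
  have hdb := pvIdx_bounds hd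
  have h1 : pvRho ((List.range (w * h_).toNat).map Int.ofNat) (pvIdx w c) = pvIdx w c := by
    have := pvP0_rho (w * h_).toNat (pvIdx w c).toNat (pvIdx_toNat_lt hc)
    rwa [Int.toNat_of_nonneg hcb.1] at this
  have h2 : pvRho ((List.range (w * h_).toNat).map Int.ofNat) (pvIdx w d) = pvIdx w d := by
    have := pvP0_rho (w * h_).toNat (pvIdx w d).toNat (pvIdx_toNat_lt hd)
    rwa [Int.toNat_of_nonneg hdb.1] at this
  rw [h1, h2] at hcd
  exact Or.inl (pvIdx_inj hc hd hcd)

-- in the body at an available cell, the cell and its available right neighbour get one root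
theorem pvCell1_right {visited : List Bool} {w h_ : Int} {P : List Int}
    (hV : pvValidP P) (hlen : P.length = (w * h_).toNat) {c : Int × Int}
    (hc : pvAvail0 visited w h_ c) (hc' : pvAvail0 visited w h_ (c.1 + 1, c.2)) :
    pvRho (pvCell1 visited w h_ P c.2 c.1) (pvIdx w c) =
      pvRho (pvCell1 visited w h_ P c.2 c.1) (pvIdx w c + 1) := by
  have hx : 0 ≤ c.1 ∧ c.1 < w := ⟨hc.1.1, hc.1.2.1⟩
  have hy : 0 ≤ c.2 ∧ c.2 < h_ := ⟨hc.1.2.2.1, hc.1.2.2.2⟩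
  have hb := pvIdxB hx hy
  have hb' : c.2 * w + c.1 + 1 < w * h_ := by nlinarith [hc'.1.2.1, hy.1, hy.2]
  have hidx : pvIdx w c = c.2 * w + c.1 := rfl
  have hidx1 : pvIdx w (c.1 + 1, c.2) = c.2 * w + c.1 + 1 := by unfold pvIdx; ring
  unfold pvCell1
  rw [if_neg (by rw [show (c.2 * w + c.1 : Int) = pvIdx w c from rfl, hc.2.1]; simp)]
  rw [if_pos (show c.1 + 1 < w ∧ visited.getD (c.2 * w + c.1 + 1).toNat false = false from
    ⟨hc'.1.2.1, by rw [← hidx1]; exact hc'.2.1⟩)]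
  obtain ⟨hV1, hlen1, hform⟩ := pvUnion_spec hV (c.2 * w + c.1) (c.2 * w + c.1 + 1)
    hb.1 (by omega) (by omega) (by omega)
  have heq1 : pvRho (pvUnion P (c.2 * w + c.1) (c.2 * w + c.1 + 1)) (c.2 * w + c.1) =
      pvRho (pvUnion P (c.2 * w + c.1) (c.2 * w + c.1 + 1)) (c.2 * w + c.1 + 1) := by
    rw [hform (c.2 * w + c.1) hb.1 (by omega), hform (c.2 * w + c.1 + 1) (by omega) (by omega),
      if_pos (Or.inl rfl), if_pos (Or.inr rfl)]
  rw [hidx]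
  by_cases hg2 : c.2 + 1 < h_ ∧ visited.getD (c.2 * w + c.1 + w).toNat false = false
  · rw [if_pos hg2]
    have hw0 : (0 : Int) < w := by omega
    have hb2 : c.2 * w + c.1 + w < w * h_ := by nlinarith [hg2.1, hx.1, hx.2]
    exact pvUnion_pres hV1 (a := c.2 * w + c.1) (b := c.2 * w + c.1 + w)
      hb.1 (by omega) (by omega) (by omega) hb.1 (by omega) (by omega) (by omega) heq1
  · rw [if_neg hg2]
    exact heq1

-- in the body at an available cell, the cell and its available down neighbour get one root
theorem pvCell1_down {visited : List Bool} {w h_ : Int} {P : List Int}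
    (hV : pvValidP P) (hlen : P.length = (w * h_).toNat) {c : Int × Int}
    (hc : pvAvail0 visited w h_ c) (hc' : pvAvail0 visited w h_ (c.1, c.2 + 1)) :
    pvRho (pvCell1 visited w h_ P c.2 c.1) (pvIdx w c) =
      pvRho (pvCell1 visited w h_ P c.2 c.1) (pvIdx w c + w) := by
  have hx : 0 ≤ c.1 ∧ c.1 < w := ⟨hc.1.1, hc.1.2.1⟩
  have hy : 0 ≤ c.2 ∧ c.2 < h_ := ⟨hc.1.2.2.1, hc.1.2.2.2⟩
  have hb := pvIdxB hx hy
  have hw0 : (0 : Int) < w := by omega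
  have hb2 : c.2 * w + c.1 + w < w * h_ := by nlinarith [hc'.1.2.2.2, hx.1, hx.2]
  have hidx : pvIdx w c = c.2 * w + c.1 := rfl
  have hidx2 : pvIdx w (c.1, c.2 + 1) = c.2 * w + c.1 + w := by unfold pvIdx; ring
  unfold pvCell1
  rw [if_neg (by rw [show (c.2 * w + c.1 : Int) = pvIdx w c from rfl, hc.2.1]; simp)]
  have hg2 : c.2 + 1 < h_ ∧ visited.getD (c.2 * w + c.1 + w).toNat false = false :=
    ⟨hc'.1.2.2.2, by rw [← hidx2]; exact hc'.2.1⟩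
  rw [hidx]
  by_cases hg1 : c.1 + 1 < w ∧ visited.getD (c.2 * w + c.1 + 1).toNat false = false
  · rw [if_pos hg1, if_pos hg2]
    have hb1' : c.2 * w + c.1 + 1 < w * h_ := by nlinarith [hg1.1, hy.1, hy.2]
    obtain ⟨hV1, hlen1, _⟩ := pvUnion_spec hV (c.2 * w + c.1) (c.2 * w + c.1 + 1)
      hb.1 (by omega) (by omega) (by omega)
    obtain ⟨hV2, hlen2, hform2⟩ := pvUnion_spec hV1 (c.2 * w + c.1) (c.2 * w + c.1 + w)
      hb.1 (by omega) (by omega) (by omega)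
    rw [hform2 (c.2 * w + c.1) hb.1 (by omega), hform2 (c.2 * w + c.1 + w) (by omega) (by omega),
      if_pos (Or.inl rfl), if_pos (Or.inr rfl)]
  · rw [if_neg hg1, if_pos hg2]
    obtain ⟨hV2, hlen2, hform2⟩ := pvUnion_spec hV (c.2 * w + c.1) (c.2 * w + c.1 + w)
      hb.1 (by omega) (by omega) (by omega)
    rw [hform2 (c.2 * w + c.1) hb.1 (by omega), hform2 (c.2 * w + c.1 + w) (by omega) (by omega),
      if_pos (Or.inl rfl), if_pos (Or.inr rfl)]

-- an adjacent available pair shares its final root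
theorem pvPass1_adj (visited : List Bool) (w h_ : Int) {u u' : Int × Int}
    (hu : pvAvail0 visited w h_ u) (hu' : pvAvail0 visited w h_ u')
    (hdir : u' = (u.1 + 1, u.2) ∨ u' = (u.1, u.2 + 1)) :
    pvRho (pvPass1 visited w h_) (pvIdx w u) = pvRho (pvPass1 visited w h_) (pvIdx w u') := by
  obtain ⟨s, t, hsplit⟩ := List.mem_iff_append.mp (pvCells_mem.mpr hu.1)
  rw [pvPass1_eq_fold, hsplit, List.foldl_append, List.foldl_cons]
  have hmem_s : ∀ d ∈ s, pvInb w h_ d := by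
    intro d hd
    exact pvCells_mem.mp (by rw [hsplit]; exact List.mem_append.mpr (Or.inl hd))
  obtain ⟨hV1, hlen1⟩ := pvFold1_VL s _ hmem_s (pvP0_valid _) (pvP0_length _)
  have hub := pvIdx_bounds hu.1
  have hub' := pvIdx_bounds hu'.1
  have hidxu' : pvIdx w u' = pvIdx w u + (if u' = (u.1 + 1, u.2) then 1 else w) := by
    rcases hdir with h | h <;> rw [h] <;> simp [pvIdx] <;> ring
  obtain ⟨hV2, hlen2⟩ := pvCell1_VL hV1 hlen1
    (⟨hu.1.1, hu.1.2.1⟩ : 0 ≤ u.1 ∧ u.1 < w) ⟨hu.1.2.2.1, hu.1.2.2.2⟩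
  have hmem_t : ∀ d ∈ t, pvInb w h_ d := by
    intro d hd
    exact pvCells_mem.mp (by
      rw [hsplit]
      exact List.mem_append.mpr (Or.inr (List.mem_cons_of_mem _ hd)))
  rcases hdir with h | h
  · have hidx' : pvIdx w u' = pvIdx w u + 1 := by rw [h]; unfold pvIdx; ring
    have heq := pvCell1_right hV1 hlen1 hu (h ▸ hu')
    rw [hidx']
    exact pvFold1_pres t _ hmem_t hV2 hlen2 hub.1 (pvIdx_toNat_lt hu.1)
      (by rw [← hidx']; exact hub'.1) (by rw [← hidx']; exact pvIdx_toNat_lt hu'.1) heq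
  · have hidx' : pvIdx w u' = pvIdx w u + w := by rw [h]; unfold pvIdx; ring
    have heq := pvCell1_down hV1 hlen1 hu (h ▸ hu')
    rw [hidx']
    exact pvFold1_pres t _ hmem_t hV2 hlen2 hub.1 (pvIdx_toNat_lt hu.1)
      (by rw [← hidx']; exact hub'.1) (by rw [← hidx']; exact pvIdx_toNat_lt hu'.1) heq

-- connected available cells share their final root
theorem pvPass1_conn (visited : List Bool) (w h_ : Int) {c d : Int × Int}
    (hc : pvAvail0 visited w h_ c) (hr : pvReach0 visited w h_ c d) :
    pvRho (pvPass1 visited w h_) (pvIdx w c) = pvRho (pvPass1 visited w h_) (pvIdx w d) := by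
  induction hr with
  | refl => rfl
  | tail hab hbc ih =>
    rename_i e f
    have he : pvAvail0 visited w h_ e := pvReach0_avail hc hab
    have hf : pvAvail0 visited w h_ f := hbc.2
    have hstep : pvRho (pvPass1 visited w h_) (pvIdx w e) =
        pvRho (pvPass1 visited w h_) (pvIdx w f) := by
      rcases hbc.1 with h | h | h | h
      · exact pvPass1_adj visited w h_ he hf (Or.inl h)
      · refine (pvPass1_adj visited w h_ hf he (Or.inl ?_)).symm
        rw [h]
        simp
      · exact pvPass1_adj visited w h_ he hf (Or.inr h)
      · refine (pvPass1_adj visited w h_ hf he (Or.inr ?_)).symm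
        rw [h]
        simp
    rw [ih, hstep]

-- the full pass-1 record
theorem pvPass1_spec (visited : List Bool) (w h_ : Int) :
    pvValidP (pvPass1 visited w h_) ∧ (pvPass1 visited w h_).length = (w * h_).toNat ∧
    (∀ c d, pvInb w h_ c → pvInb w h_ d →
      pvRho (pvPass1 visited w h_) (pvIdx w c) = pvRho (pvPass1 visited w h_) (pvIdx w d) →
      c = d ∨ (pvAvail0 visited w h_ c ∧ pvReach0 visited w h_ c d)) := by
  have h := pvFold1_inv1 (pvCells w h_) _ (fun d hd => pvCells_mem.mp hd)
    (pvP0_inv1 visited w h_)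
  rw [← pvPass1_eq_fold] at h
  exact h

theorem pvExists_min {α : Type} (f : α → Int) :
    ∀ l : List α, l ≠ [] → ∃ m ∈ l, ∀ x ∈ l, f m ≤ f x := by
  intro l
  induction l with
  | nil => intro h; exact absurd rfl h
  | cons a t ih =>
    intro _
    rcases t.eq_nil_or_concat' with rfl | ⟨_, _, _⟩
    · exact ⟨a, List.mem_cons_self, by
        intro x hx
        rcases List.mem_singleton.mp hx with rfl
        exact le_refl _⟩
    · obtain ⟨m, hm, hmin⟩ := ih (by simp_all)
      by_cases hle : f a ≤ f m
      · refine ⟨a, List.mem_cons_self, ?_⟩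
        intro x hx
        rcases List.mem_cons.mp hx with rfl | hx'
        · exact le_refl _
        · exact le_trans hle (hmin x hx')
      · refine ⟨m, List.mem_cons_of_mem _ hm, ?_⟩
        intro x hx
        rcases List.mem_cons.mp hx with rfl | hx'
        · omega
        · exact hmin x hx'

-- two first cells with the same final root are the same cell
theorem pvFirst_key_inj (visited : List Bool) (w h_ : Int) {m m' : Int × Int}
    (hm : pvIsFirst visited w h_ m) (hm' : pvIsFirst visited w h_ m')
    (hkey : pvRho (pvPass1 visited w h_) (pvIdx w m) = pvRho (pvPass1 visited w h_) (pvIdx w m')) :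
    m = m' := by
  rcases (pvPass1_spec visited w h_).2.2 m m' hm.1.1 hm'.1.1 hkey with h | h
  · exact h
  · exact pvIdx_inj hm.1.1 hm'.1.1
      (le_antisymm (hm.2 m' hm'.1 h.2) (hm'.2 m hm.1 (pvReach0_symm hm.1 h.2)))

-- every available cell's component has a (unique) first cell
theorem pvFirst_exists (visited : List Bool) (w h_ : Int) {c : Int × Int}
    (hc : pvAvail0 visited w h_ c) :
    ∃ m, pvIsFirst visited w h_ m ∧ pvReach0 visited w h_ c m ∧
      ∀ d, pvAvail0 visited w h_ d → pvReach0 visited w h_ c d → pvIdx w m ≤ pvIdx w d := by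
  have hne : (pvCells w h_).filter (pvMemD visited w h_ c) ≠ [] := by
    intro h
    have := List.filter_eq_nil_iff.mp h c (pvCells_mem.mpr hc.1)
    exact this (pvMemD_iff.mpr ⟨hc, Relation.ReflTransGen.refl⟩)
  obtain ⟨m, hmem, hmin⟩ := pvExists_min (pvIdx w) _ hne
  obtain ⟨hmc, hmD⟩ := List.mem_filter.mp hmem
  obtain ⟨hmav, hmr⟩ := pvMemD_iff.mp hmD
  refine ⟨m, ⟨hmav, ?_⟩, hmr, ?_⟩
  · intro d hd hr
    exact hmin d (List.mem_filter.mpr ⟨pvCells_mem.mpr hd.1,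
      pvMemD_iff.mpr ⟨hd, pvReach0_trans hmr hr⟩⟩)
  · intro d hd hr
    exact hmin d (List.mem_filter.mpr ⟨pvCells_mem.mpr hd.1, pvMemD_iff.mpr ⟨hd, hr⟩⟩)

-- B's pass-2 dict always holds, for each first cell seen so far (in row-major order),
-- its final root and the stats of the component members processed so far
theorem pvPass2_fold (visited : List Bool) (w h_ : Int) :
    ∀ (rest done : List (Int × Int)) (D : PySem.Dict Int (Int × Int × Int × Int × Int)),
    pvCells w h_ = done ++ rest →
    D.items = (done.filter (pvFirstD visited w h_)).map
        (fun m => (pvRho (pvPass1 visited w h_) (pvIdx w m), pvEntryPre visited w h_ done m)) →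
    (rest.foldl (fun d c => pvCell2 visited w (pvPass1 visited w h_) d c.2 c.1) D).items
      = ((done ++ rest).filter (pvFirstD visited w h_)).map
          (fun m => (pvRho (pvPass1 visited w h_) (pvIdx w m),
            pvEntryPre visited w h_ (done ++ rest) m)) := by
  intro rest
  induction rest with
  | nil =>
    intro done D hsplit hD
    simpa using hD
  | cons c rest' ih =>
    intro done D hsplit hD
    have hcInb : pvInb w h_ c := pvCells_mem.mp (by
      rw [hsplit]
      exact List.mem_append.mpr (Or.inr List.mem_cons_self))
    have hsplit' : pvCells w h_ = (done ++ [c]) ++ rest' := by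
      rw [hsplit, List.append_assoc, List.singleton_append]
    have hdoneNd : done.Nodup :=
      (hsplit ▸ pvCells_nodup w h_).of_append_left
    have hfirsts : ∀ m ∈ done.filter (pvFirstD visited w h_), pvIsFirst visited w h_ m := by
      intro m hm
      exact pvFirstD_iff.mp (List.mem_filter.mp hm).2
    have hKeys : D.keys = (done.filter (pvFirstD visited w h_)).map
        (fun m => pvRho (pvPass1 visited w h_) (pvIdx w m)) := by
      show D.items.map (·.1) = _
      rw [hD, List.map_map]
      rfl
    have hKnd : D.keys.Nodup := by
      rw [hKeys]
      exact List.Nodup.map_on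
        (fun x hx y hy h => pvFirst_key_inj visited w h_ (hfirsts x hx) (hfirsts y hy) h)
        (hdoneNd.filter _)
    rw [List.foldl_cons]
    by_cases hv : visited.getD (c.2 * w + c.1).toNat false = true
    · -- background pixel: the dict is unchanged
      have hstep : pvCell2 visited w (pvPass1 visited w h_) D c.2 c.1 = D := by
        unfold pvCell2
        rw [if_pos hv]
      have hnav : ¬ pvAvail0 visited w h_ c := fun h => by
        have h2 := h.2.1
        rw [show pvIdx w c = c.2 * w + c.1 from rfl] at h2
        rw [h2] at hv
        exact Bool.false_ne_true hv
      have hfD : pvFirstD visited w h_ c = false := by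
        rw [Bool.eq_false_iff]
        intro h
        exact hnav (pvFirstD_iff.mp h).1
      have hent : ∀ m, pvEntryPre visited w h_ (done ++ [c]) m = pvEntryPre visited w h_ done m := by
        intro m
        unfold pvEntryPre
        rw [List.filter_append]
        have : pvMemD visited w h_ m c = false := by
          rw [Bool.eq_false_iff]
          intro h
          exact hnav (pvMemD_iff.mp h).1
        simp [this]
      rw [hstep, ih (done ++ [c]) D hsplit'
        (by
          rw [hD, List.filter_append]
          simp only [hfD, List.filter_cons, List.filter_nil, Bool.false_eq_true, if_false]
          rw [List.append_nil]
          exact List.map_congr_left (fun m _ => by rw [hent m]))]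
      rw [List.append_assoc, List.singleton_append]
    · have hcav : pvAvail0 visited w h_ c :=
        pvAvail0_mk hcInb (by simpa using hv)
      by_cases hf : pvIsFirst visited w h_ c
      · -- first cell of its component: a fresh key is appended
        have hnotmem : ∀ m ∈ done.filter (pvFirstD visited w h_),
            pvRho (pvPass1 visited w h_) (pvIdx w m) ≠
              pvRho (pvPass1 visited w h_) (pvIdx w c) := by
          intro m hm hkey
          have hmF := hfirsts m hm
          have hmdone := (List.mem_filter.mp hm).1
          rcases (pvPass1_spec visited w h_).2.2 m c hmF.1.1 hcInb hkey with h | h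
          · subst h
            have := pvCells_done_lt hsplit hmdone
            omega
          · have h1 := hf.2 m hmF.1 (pvReach0_symm hmF.1 h.2)
            have h2 := pvCells_done_lt hsplit hmdone
            omega
        have hcont : D.contains (pvRho (pvPass1 visited w h_) (pvIdx w c)) = false := by
          rw [Bool.eq_false_iff]
          intro h
          have hk := (PySem.Dict.contains_iff_mem_keys D _).mp h
          rw [hKeys] at hk
          obtain ⟨m, hm, hkey⟩ := List.mem_map.mp hk
          exact hnotmem m hm hkey
        have hget : D.get? (pvRho (pvPass1 visited w h_) (pvIdx w c)) = none :=
          (PySem.Dict.get?_eq_none_iff_contains D _).mpr hcont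
        have hstep : pvCell2 visited w (pvPass1 visited w h_) D c.2 c.1 =
            D.insert (pvRho (pvPass1 visited w h_) (pvIdx w c)) (c.1, c.2, c.1, c.2, 1) := by
          unfold pvCell2
          rw [if_neg hv]
          rw [show pvFind (pvPass1 visited w h_) (pvPass1 visited w h_).length
            (c.2 * w + c.1) = pvRho (pvPass1 visited w h_) (pvIdx w c) from rfl]
          simp only [hget]
        have hcompnil : done.filter (pvMemD visited w h_ c) = [] := by
          rw [List.filter_eq_nil_iff]
          intro d hd hmem
          obtain ⟨hdav, hdr⟩ := pvMemD_iff.mp hmem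
          have h1 := hf.2 d hdav hdr
          have h2 := pvCells_done_lt hsplit hd
          omega
        have hentc : pvEntryPre visited w h_ (done ++ [c]) c = (c.1, c.2, c.1, c.2, 1) := by
          unfold pvEntryPre
          rw [List.filter_append, hcompnil]
          have : pvMemD visited w h_ c c = true :=
            pvMemD_iff.mpr ⟨hcav, Relation.ReflTransGen.refl⟩
          simp only [List.nil_append, List.filter_cons, this, if_pos, List.filter_nil]
          simp [pvStep]
        have hentm : ∀ m ∈ done.filter (pvFirstD visited w h_),
            pvEntryPre visited w h_ (done ++ [c]) m = pvEntryPre visited w h_ done m := by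
          intro m hm
          unfold pvEntryPre
          rw [List.filter_append]
          have : pvMemD visited w h_ m c = false := by
            rw [Bool.eq_false_iff]
            intro h
            obtain ⟨_, hr⟩ := pvMemD_iff.mp h
            exact hnotmem m hm
              (pvPass1_conn visited w h_ (hfirsts m hm).1 hr)
          simp [this]
        rw [hstep, ih (done ++ [c]) _ hsplit'
          (by
            rw [PySem.Dict.items_insert_of_not_contains D _ hcont, hD, List.filter_append]
            have hfT : pvFirstD visited w h_ c = true := pvFirstD_iff.mpr hf
            simp only [hfT, List.filter_cons, if_pos, List.filter_nil]
            rw [List.map_append]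
            congr 1
            · exact (List.map_congr_left (fun m hm => by rw [hentm m hm])).symm
            · simp [hentc])]
        rw [List.append_assoc, List.singleton_append]
      · -- later cell of a component already keyed by its first cell
        obtain ⟨m, hmF, hmr, hmmin⟩ := pvFirst_exists visited w h_ hcav
        have hmltc : pvIdx w m < pvIdx w c := by
          have hne : m ≠ c := fun h => hf (h ▸ hmF)
          have hle := hmmin c hcav Relation.ReflTransGen.refl
          rcases lt_or_eq_of_le hle with h | h
          · exact h
          · exact absurd (pvIdx_inj hmF.1.1 hcInb h) hne
        have hmdone : m ∈ done := pvCells_earlier hsplit hmF.1.1 hmltc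
        have hkey : pvRho (pvPass1 visited w h_) (pvIdx w m) =
            pvRho (pvPass1 visited w h_) (pvIdx w c) :=
          pvPass1_conn visited w h_ hmF.1 (pvReach0_symm hcav hmr)
        have hitem : (pvRho (pvPass1 visited w h_) (pvIdx w c),
            pvEntryPre visited w h_ done m) ∈ D.items := by
          rw [hD]
          refine List.mem_map.mpr ⟨m, List.mem_filter.mpr ⟨hmdone, pvFirstD_iff.mpr hmF⟩, ?_⟩
          rw [hkey]
        have hget : D.get? (pvRho (pvPass1 visited w h_) (pvIdx w c)) =
            some (pvEntryPre visited w h_ done m) :=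
          PySem.Dict.get?_of_mem_items D hitem hKnd
        have hcont : D.contains (pvRho (pvPass1 visited w h_) (pvIdx w c)) = true := by
          rw [PySem.Dict.contains_eq_isSome_get?, hget]
          rfl
        have hstep : pvCell2 visited w (pvPass1 visited w h_) D c.2 c.1 =
            D.insert (pvRho (pvPass1 visited w h_) (pvIdx w c))
              (pvStep (pvEntryPre visited w h_ done m) c) := by
          unfold pvCell2
          rw [if_neg hv]
          rw [show pvFind (pvPass1 visited w h_) (pvPass1 visited w h_).length
            (c.2 * w + c.1) = pvRho (pvPass1 visited w h_) (pvIdx w c) from rfl]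
          simp only [hget]
          rfl
        have hfD : pvFirstD visited w h_ c = false := by
          rw [Bool.eq_false_iff]
          intro h
          exact hf (pvFirstD_iff.mp h)
        rw [hstep, ih (done ++ [c]) _ hsplit'
          (by
            rw [PySem.Dict.items_insert_of_contains D _ hcont, hD, List.map_map,
              List.filter_append]
            simp only [hfD, List.filter_cons, Bool.false_eq_true, if_false, List.filter_nil]
            rw [List.append_nil]
            refine List.map_congr_left ?_
            intro m' hm'
            show (if (pvRho (pvPass1 visited w h_) (pvIdx w m') ==
                pvRho (pvPass1 visited w h_) (pvIdx w c)) = true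
              then (pvRho (pvPass1 visited w h_) (pvIdx w c),
                pvStep (pvEntryPre visited w h_ done m) c)
              else (pvRho (pvPass1 visited w h_) (pvIdx w m'),
                pvEntryPre visited w h_ done m')) = _
            by_cases hkm : pvRho (pvPass1 visited w h_) (pvIdx w m') =
                pvRho (pvPass1 visited w h_) (pvIdx w c)
            · have hm'm : m' = m := pvFirst_key_inj visited w h_ (hfirsts m' hm') hmF
                (by rw [hkm, hkey])
              subst hm'm
              rw [if_pos (beq_iff_eq.mpr hkm)]
              have hmemc : pvMemD visited w h_ m' c = true :=
                pvMemD_iff.mpr ⟨hcav, pvReach0_symm hcav hmr⟩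
              have : pvEntryPre visited w h_ (done ++ [c]) m' =
                  pvStep (pvEntryPre visited w h_ done m') c := by
                unfold pvEntryPre
                rw [List.filter_append]
                simp only [List.filter_cons, hmemc, if_pos, List.filter_nil]
                rw [List.foldl_concat]
              rw [this, hkm]
            · have hne : (pvRho (pvPass1 visited w h_) (pvIdx w m') ==
                  pvRho (pvPass1 visited w h_) (pvIdx w c)) = false := by
                rw [Bool.eq_false_iff]
                intro h
                exact hkm (beq_iff_eq.mp h)
              simp only [hne, Bool.false_eq_true, if_false]
              have : pvEntryPre visited w h_ (done ++ [c]) m' =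
                  pvEntryPre visited w h_ done m' := by
                unfold pvEntryPre
                rw [List.filter_append]
                have hmf : pvMemD visited w h_ m' c = false := by
                  rw [Bool.eq_false_iff]
                  intro h
                  obtain ⟨_, hr⟩ := pvMemD_iff.mp h
                  exact hkm (pvPass1_conn visited w h_ (hfirsts m' hm').1 hr)
                simp [hmf]
              rw [this])]
        rw [List.append_assoc, List.singleton_append]

-- Port B computes the canonical region list
theorem pvB_canon (visited : List Bool) (w h_ min_size : Int) :
    find_sprite_regions_alt visited w h_ min_size = pvCanon visited w h_ min_size := by
  have hP2 : (pvPass2 visited w h_ (pvPass1 visited w h_)).items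
      = ((pvCells w h_).filter (pvFirstD visited w h_)).map
          (fun m => (pvRho (pvPass1 visited w h_) (pvIdx w m), pvEntryC visited w h_ m)) := by
    unfold pvPass2
    rw [pvFold_cells w h_ (fun d y x => pvCell2 visited w (pvPass1 visited w h_) d y x)]
    have := pvPass2_fold visited w h_ (pvCells w h_) [] PySem.Dict.empty (by simp) (by rfl)
    simpa using this
  have hvals : (pvPass2 visited w h_ (pvPass1 visited w h_)).values
      = ((pvCells w h_).filter (pvFirstD visited w h_)).map (pvEntryC visited w h_) := by
    show (pvPass2 visited w h_ (pvPass1 visited w h_)).items.map (·.2) = _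
    rw [hP2, List.map_map]
    rfl
  show (pvPass2 visited w h_ (pvPass1 visited w h_)).values.foldl
      (fun regions s =>
        if s.2.2.1 - s.1 + 1 ≥ min_size ∧ s.2.2.2.1 - s.2.1 + 1 ≥ min_size then
          regions ++ [[s.1, s.2.1, s.2.2.1 + 1, s.2.2.2.1 + 1, s.2.2.2.2]]
        else regions) [] = pvCanon visited w h_ min_size
  rw [hvals]
  rfl

-- ===== VERDICT (by name: the statement is the Claim_ definition above) =====
theorem find_sprite_regions_spec : Claim_equal_find_sprite_regions := by
  intro visited w h_ min_size _ _
  unfold Spec_find_sprite_regions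
  rw [pvA_canon, pvB_canon]
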